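-- pv_equiv track=rewrite | github.com/jyztintan/leetcode | Python/max_num_k_divisible_components.py | maxKDivisibleComponents
-- ===== SOURCE A (Python) =====
-- from collections import defaultdict, deque
-- from typing import List
--
-- def maxKDivisibleComponents(n: int, edges: List[List[int]], values: List[int], k: int) -> int:
--     if not edges:
--         return 1
--
--     in_degrees = [0] * n
--     adj_list = defaultdict(list)
--     for u, v in edges:
--         in_degrees[u] += 1
--         in_degrees[v] += 1
--         adj_list[u].append(v)
--         adj_list[v].append(u)
--
--     q = deque()
--     for node in range(n):
--         if in_degrees[node] == 1:
--             q.append(node)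
--
--     count = 0
--     while q:
--         node = q.popleft()
--         add_value = 0
--         in_degrees[node] -= 1
--
--         if values[node] % k == 0:
--             count += 1
--         else:
--             add_value = values[node]
--
--         for neighbour in adj_list[node]:
--             if in_degrees[neighbour] == 0:
--                 continue
--             in_degrees[neighbour] -= 1
--             values[neighbour] += add_value
--             if in_degrees[neighbour] == 1:
--                 q.append(neighbour)
--
--     return count
-- ===== SOURCE B (Python) =====
-- from typing import List
--
-- def maxKDivisibleComponents(n: int, edges: List[List[int]], values: List[int], k: int) -> int:
--     def neighbours(x):
--         return [v if u == x else u for u, v in edges if u == x or v == x]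
--
--     def side_sum(node, parent):
--         return values[node] + sum(side_sum(w, node)
--                                   for w in neighbours(node) if w != parent)
--
--     count = 0
--     for u, v in edges:
--         if side_sum(u, v) % k == 0:
--             count += 1
--     return count + 1
-- ===== Notes on version B (the rewrite author's own statement) =====
-- stated objective: alternative
-- what changed: Replaces A's in-degree leaf-peeling queue with upward value propagation by a direct per-edge count: for each edge, a DFS sums the values on one side and the edge is counted when that side sum is divisible by k; the answer is that count plus one. …
-- outside the precondition, e.g. on maxKDivisibleComponents(4, [[0, 1], [2, 3], [1, 2], [0, 3]], [1, 1, 1, 1], 2): A returns 0, B raises RecursionError; on maxKDivisibleComponents(3, [[0, 1], [1, 2]], [1, 1, 1], 2): A returns 0, B returns 2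
import Mathlib
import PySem

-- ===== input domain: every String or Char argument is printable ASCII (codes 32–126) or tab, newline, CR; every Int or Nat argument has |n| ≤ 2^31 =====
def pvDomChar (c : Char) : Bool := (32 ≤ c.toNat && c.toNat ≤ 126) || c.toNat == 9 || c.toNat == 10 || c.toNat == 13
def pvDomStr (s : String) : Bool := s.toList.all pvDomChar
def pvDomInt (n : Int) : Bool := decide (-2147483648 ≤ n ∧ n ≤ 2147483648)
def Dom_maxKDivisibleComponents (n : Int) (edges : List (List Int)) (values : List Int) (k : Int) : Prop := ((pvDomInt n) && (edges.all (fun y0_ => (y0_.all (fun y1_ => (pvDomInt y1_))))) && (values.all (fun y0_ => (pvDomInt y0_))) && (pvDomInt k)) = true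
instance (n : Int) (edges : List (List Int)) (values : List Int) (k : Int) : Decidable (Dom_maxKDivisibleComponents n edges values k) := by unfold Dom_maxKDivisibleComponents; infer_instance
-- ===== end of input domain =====

-- B replaces A's in-degree leaf-peeling queue by a direct count of edges whose one side has a
-- k-divisible value sum (an alternative algorithm, no mutable frontier); equivalence is about the
-- RETURN value only (the Python A mutates its `values` argument in place, B does not).

-- ===== PORT A =====
-- xs[i] read with default; every use below is on an in-range index under Pre_ (Python raises otherwise)
def pvGetI (xs : List Int) (i : Int) : Int := (PySem.List.pyGet? xs i).getD 0
def pvIncAt (xs : List Int) (i : Int) : List Int := PySem.List.pySetD xs i (pvGetI xs i + 1)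
def pvDecAt (xs : List Int) (i : Int) : List Int := PySem.List.pySetD xs i (pvGetI xs i - 1)
def pvAddAt (xs : List Int) (i : Int) (a : Int) : List Int := PySem.List.pySetD xs i (pvGetI xs i + a)

-- the build loop: `for u, v in edges: in_degrees[u] += 1; in_degrees[v] += 1; adj[u].append(v); adj[v].append(u)`
-- (a non-2-element edge raises ValueError in Python: such inputs lie outside Pre_)
def pvBuild (n : Int) (edges : List (List Int)) : List Int × PySem.Dict Int (List Int) :=
  edges.foldl
    (fun st e => match e with
      | [u, v] => (pvIncAt (pvIncAt st.1 u) v,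
                   (st.2.modify u [] (· ++ [v])).modify v [] (· ++ [u]))
      | _ => st)
    (List.replicate n.toNat (0:Int), PySem.Dict.empty)

-- body of `for neighbour in adj_list[node]: ...`, state = (in_degrees, values, q)
def pvNbrStep (add : Int) (st : List Int × List Int × List Int) (w : Int) : List Int × List Int × List Int :=
  if pvGetI st.1 w = 0 then st
  else
    let deg := pvDecAt st.1 w
    let val := pvAddAt st.2.1 w add
    (deg, val, if pvGetI deg w = 1 then st.2.2 ++ [w] else st.2.2)

-- the `while q:` loop; fuel n + 2*|edges| + 1 bounds the number of pops the Python loop can perform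
def pvLoop (k : Int) (adj : PySem.Dict Int (List Int)) :
    Nat → List Int → List Int → List Int → Int → Int
  | 0, _, _, _, c => c
  | f + 1, deg, val, q, c =>
    match q with
    | [] => c
    | v :: qs =>
      let deg1 := pvDecAt deg v
      let dv := pvGetI val v
      let c1 := if PySem.Int.mod dv k = 0 then c + 1 else c
      let add := if PySem.Int.mod dv k = 0 then 0 else dv
      let st := (adj.getD v []).foldl (pvNbrStep add) (deg1, val, qs)
      pvLoop k adj f st.1 st.2.1 st.2.2 c1

def maxKDivisibleComponents (n : Int) (edges : List (List Int)) (values : List Int) (k : Int) : Int :=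
  if edges = [] then 1
  else
    let st := pvBuild n edges
    let q0 := (PySem.List.pyRange 0 n 1).filter (fun v => pvGetI st.1 v = 1)
    pvLoop k st.2 (n.toNat + 2 * edges.length + 1) st.1 values q0 0

-- ===== PORT B =====
-- `[v if u == x else u for u, v in edges if u == x or v == x]` (malformed entries raise in Python: outside Pre_)
def pvNbrs (edges : List (List Int)) (x : Int) : List Int :=
  edges.filterMap (fun e => match e with
    | [u, v] => if u = x then some v else if v = x then some u else none
    | _ => none)

-- `side_sum(node, parent) = values[node] + sum(side_sum(w, node) for w in neighbours(node) if w != parent)`;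
-- the fuel n+1 bounds the recursion depth on every input admitted by Pre_ (a tree on n vertices)
def pvSideSum (edges : List (List Int)) (values : List Int) : Nat → Int → Int → Int
  | 0, _, _ => 0
  | f + 1, node, parent =>
    pvGetI values node +
      ((pvNbrs edges node).filter (fun w => w ≠ parent)).foldl
        (fun s w => s + pvSideSum edges values f w node) 0

def maxKDivisibleComponents_alt (n : Int) (edges : List (List Int)) (values : List Int) (k : Int) : Int :=
  edges.foldl
    (fun c e => match e with
      | [u, v] => if PySem.Int.mod (pvSideSum edges values (n.toNat + 1) u v) k = 0 then c + 1 else c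
      | _ => c) 0
  + 1

-- ===== PRECONDITION & SPEC =====
def pvEdgeOK (n : Int) (e : List Int) : Bool :=
  match e with
  | [u, v] => decide (0 ≤ u ∧ u < n ∧ 0 ≤ v ∧ v < n ∧ u ≠ v)
  | _ => false

def pvGrow (edges : List (List Int)) (S : List Int) : List Int :=
  S ++ edges.filterMap (fun e => match e with
    | [u, v] => if u ∈ S then some v else if v ∈ S then some u else none
    | _ => none)

def pvClosure (edges : List (List Int)) : Nat → List Int
  | 0 => [0]
  | m + 1 => pvGrow edges (pvClosure edges m)

-- Pre_ admits the early-return case edges = [] unconditionally, and otherwise exactly the problem's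
-- intended domain: edges a tree on the n vertices 0..n-1 (n-1 two-element in-range loop-free edges,
-- all vertices connected to 0), at least n values, k ≠ 0, and a total value sum divisible by k.
-- It excludes inputs on which A raises (bad indices, malformed edges, k = 0, too few values) and two
-- defensible corners on which A returns: non-tree edge lists and trees whose total is not divisible
-- by k — there the count depends on A's accidental peeling/queue order (relabelling vertices changes
-- A's answer), so neither A's nor B's value is the specified one.
def Pre_maxKDivisibleComponents (n : Int) (edges : List (List Int)) (values : List Int) (k : Int) : Prop :=
  edges = [] ∨
  (n = edges.length + 1 ∧ n ≤ (values.length : Int) ∧ k ≠ 0 ∧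
   (∀ e ∈ edges, pvEdgeOK n e = true) ∧
   (∀ v ∈ PySem.List.pyRange 0 n 1, v ∈ pvClosure edges n.toNat) ∧
   PySem.Int.mod (((PySem.List.pyRange 0 n 1).map (pvGetI values)).sum) k = 0)

instance (n : Int) (edges : List (List Int)) (values : List Int) (k : Int) : Decidable (Pre_maxKDivisibleComponents n edges values k) := by
  unfold Pre_maxKDivisibleComponents; infer_instance

def pvWitness_maxKDivisibleComponents : Int × List (List Int) × List Int × Int :=
  (5, [[0, 1], [1, 2], [1, 3], [3, 4]], [1, 2, 3, 4, 5], 3)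

def Spec_maxKDivisibleComponents (n : Int) (edges : List (List Int)) (values : List Int) (k : Int) (out : Int) : Prop := out = maxKDivisibleComponents_alt n edges values k
instance (n : Int) (edges : List (List Int)) (values : List Int) (k : Int) (out : Int) : Decidable (Spec_maxKDivisibleComponents n edges values k out) := by unfold Spec_maxKDivisibleComponents; infer_instance

-- ===== CLAIM (what is proved, stated in full; the proofs are below) =====
def Claim_equal_maxKDivisibleComponents : Prop := ∀ (n : Int) (edges : List (List Int)) (values : List Int) (k : Int), Dom_maxKDivisibleComponents n edges values k → Pre_maxKDivisibleComponents n edges values k → Spec_maxKDivisibleComponents n edges values k (maxKDivisibleComponents n edges values k)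

-- ===== LEMMAS AND PROOFS =====

-- basic objects of the proofs: incidence, degree, induced edge list, value sums, and the edge-count helper
def pvIncB (x : Int) (e : List Int) : Bool :=
  match e with | [u, v] => u == x || v == x | _ => false

def pvDegc (E : List (List Int)) (x : Int) : Nat := E.countP (pvIncB x)

def pvEfil (edges : List (List Int)) (V : List Int) : List (List Int) :=
  edges.filter (fun e => match e with | [u, v] => decide (u ∈ V) && decide (v ∈ V) | _ => false)

def pvSumV (values : List Int) (V : List Int) : Int := (V.map (pvGetI values)).sum

def pvCount (E : List (List Int)) (values : List Int) (f : Nat) (k : Int) : Int :=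
  E.foldl (fun c e => match e with
    | [u, v] => if PySem.Int.mod (pvSideSum E values f u v) k = 0 then c + 1 else c
    | _ => c) 0

theorem pvAlt_eq_count (n : Int) (edges : List (List Int)) (values : List Int) (k : Int) :
    maxKDivisibleComponents_alt n edges values k = pvCount edges values (n.toNat + 1) k + 1 := rfl

-- `pvPeel V E`: the vertex list V (distinct) with edge entries E forms a tree, certified by a
-- leaf-attachment order; both lists are tracked up to permutation.
inductive pvPeel : List Int → List (List Int) → Prop
  | single (v : Int) : pvPeel [v] []
  | step (v u : Int) (V W : List Int) (E E' : List (List Int)) :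
      v ∉ V → u ∈ V → pvPeel V E' →
      W.Perm (v :: V) → (E.Perm ([v, u] :: E') ∨ E.Perm ([u, v] :: E')) →
      pvPeel W E

theorem pvPeel_perm_V {V W : List Int} {E : List (List Int)} (h : pvPeel V E) (hp : V.Perm W) :
    pvPeel W E := by
  cases h with
  | single v =>
      have hw : W = [v] := List.perm_singleton.mp hp.symm
      rw [hw]; exact pvPeel.single v
  | step v u V₀ W₀ E₀ E' hv hu hpe hW hE =>
      exact pvPeel.step v u V₀ W E E' hv hu hpe (hp.symm.trans hW) hE

theorem pvPeel_perm_E {V : List Int} {E F : List (List Int)} (h : pvPeel V E) (hp : E.Perm F) :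
    pvPeel V F := by
  cases h with
  | single v =>
      have : F = [] := hp.symm.eq_nil
      rw [this]; exact pvPeel.single v
  | step v u V₀ W₀ E₀ E' hv hu hpe hW hE =>
      refine pvPeel.step v u V₀ V F E' hv hu hpe hW ?_
      rcases hE with h1 | h1
      · exact Or.inl (hp.symm.trans h1)
      · exact Or.inr (hp.symm.trans h1)

theorem pvPeel_nodup {V : List Int} {E : List (List Int)} (h : pvPeel V E) : V.Nodup := by
  induction h with
  | single v => simp
  | step v u V₀ W₀ E₀ E' hv hu hpe hW hE ih =>
      exact (List.Perm.nodup_iff hW).mpr (by simp [List.nodup_cons, hv, ih])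

theorem pvPeel_length {V : List Int} {E : List (List Int)} (h : pvPeel V E) :
    E.length + 1 = V.length := by
  induction h with
  | single v => simp
  | step v u V₀ W₀ E₀ E' hv hu hpe hW hE ih =>
      rcases hE with h1 | h1 <;>
        simp [List.Perm.length_eq hW, List.Perm.length_eq h1, ← ih]

theorem pvPeel_valid {V : List Int} {E : List (List Int)} (h : pvPeel V E) :
    ∀ e ∈ E, ∃ a b, e = [a, b] ∧ a ∈ V ∧ b ∈ V ∧ a ≠ b := by
  induction h with
  | single v => simp
  | step v u V₀ W₀ E₀ E' hv hu hpe hW hE ih =>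
      intro e he
      have hmemW : ∀ x, x ∈ V₀ → x ∈ W₀ := fun x hx => (hW.mem_iff).mpr (by simp [hx])
      have hvW : v ∈ W₀ := (hW.mem_iff).mpr (by simp)
      have hne : v ≠ u := fun h => hv (h ▸ hu)
      rcases hE with h1 | h1
      · rcases List.mem_cons.mp ((h1.mem_iff).mp he) with h2 | h2
        · exact ⟨v, u, by simpa using h2, hvW, hmemW u hu, hne⟩
        · rcases ih e h2 with ⟨a, b, rfl, ha, hb, hab⟩
          exact ⟨a, b, rfl, hmemW a ha, hmemW b hb, hab⟩
      · rcases List.mem_cons.mp ((h1.mem_iff).mp he) with h2 | h2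
        · exact ⟨u, v, by simpa using h2, hmemW u hu, hvW, hne.symm⟩
        · rcases ih e h2 with ⟨a, b, rfl, ha, hb, hab⟩
          exact ⟨a, b, rfl, hmemW a ha, hmemW b hb, hab⟩

theorem pvDegc_perm {E F : List (List Int)} (h : E.Perm F) (x : Int) :
    pvDegc E x = pvDegc F x := h.countP_eq _

theorem pvDegc_cons (e : List Int) (E : List (List Int)) (x : Int) :
    pvDegc (e :: E) x = (if pvIncB x e then 1 else 0) + pvDegc E x := by
  simp [pvDegc, List.countP_cons]; omega

theorem pvIncB_pair (x a b : Int) : pvIncB x [a, b] = (a == x || b == x) := rfl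

theorem pvIncB_pair_false {x a b : Int} (ha : a ≠ x) (hb : b ≠ x) : pvIncB x [a, b] = false := by
  simp [pvIncB_pair, ha, hb]

theorem pvDegc_pos_of_mem {E : List (List Int)} {e : List Int} {x : Int}
    (he : e ∈ E) (hinc : pvIncB x e = true) : 0 < pvDegc E x :=
  List.countP_pos_iff.mpr ⟨e, he, hinc⟩

theorem pvPeel_deg_zero {V : List Int} {E : List (List Int)} (h : pvPeel V E) :
    ∀ x ∈ V, pvDegc E x = 0 → V = [x] := by
  induction h with
  | single v => intro x hx _; simp at hx; rw [hx]
  | step v u V₀ W₀ E₀ E' hv hu hpe hW hE ih =>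
      intro x hx hdeg
      exfalso
      have hxm : x = v ∨ x ∈ V₀ := by
        have := (hW.mem_iff).mp hx; simpa using this
      have hvu : v ≠ u := fun h => hv (h ▸ hu)
      have key : ∀ a b : Int, E₀.Perm ([a, b] :: E') → (a = v ∧ b = u) ∨ (a = u ∧ b = v) → False := by
        intro a b h1 hor
        rw [pvDegc_perm h1 x, pvDegc_cons] at hdeg
        have hax : a ≠ x := by
          intro hh; subst hh; simp [pvIncB_pair] at hdeg
        have hbx : b ≠ x := by
          intro hh; subst hh; simp [pvIncB_pair] at hdeg
        have hxv : x ≠ v := by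
          rcases hor with ⟨rfl, rfl⟩ | ⟨rfl, rfl⟩
          · exact fun hh => hax hh.symm
          · exact fun hh => hbx hh.symm
        have hxu : x ≠ u := by
          rcases hor with ⟨rfl, rfl⟩ | ⟨rfl, rfl⟩
          · exact fun hh => hbx hh.symm
          · exact fun hh => hax hh.symm
        have hxV : x ∈ V₀ := hxm.resolve_left hxv
        have hdeg' : pvDegc E' x = 0 := by
          rw [pvIncB_pair_false hax hbx] at hdeg; simpa using hdeg
        have := ih x hxV hdeg'
        rw [this] at hu; simp at hu; exact hxu hu.symm
      rcases hE with h1 | h1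
      · exact key v u h1 (Or.inl ⟨rfl, rfl⟩)
      · exact key u v h1 (Or.inr ⟨rfl, rfl⟩)

theorem pvCountP_ab : ∀ (V : List Int) (a b : Int), a ≠ b →
    V.countP (fun x => a == x || b == x) = V.count a + V.count b := by
  intro V a b hab
  induction V with
  | nil => simp
  | cons y V ih =>
      by_cases hya : y = a
      · subst hya
        have : b ≠ y := fun hh => hab hh.symm
        simp [List.countP_cons, List.count_cons, ih, hab, this]
        omega
      · by_cases hyb : y = b
        · subst hyb
          simp [List.countP_cons, List.count_cons, ih, fun hh => hya hh]
          omega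
        · have h1 : ¬ a = y := fun hh => hya hh.symm
          have h2 : ¬ b = y := fun hh => hyb hh.symm
          simp [List.countP_cons, List.count_cons, ih, h1, h2, hya, hyb]

theorem pvCountP_two {a b : Int} (V : List Int) (hnd : V.Nodup) (hab : a ≠ b)
    (ha : a ∈ V) (hb : b ∈ V) : V.countP (fun x => a == x || b == x) = 2 := by
  rw [pvCountP_ab V a b hab, List.count_eq_one_of_mem hnd ha, List.count_eq_one_of_mem hnd hb]

theorem pvHandshake : ∀ (E : List (List Int)) (V : List Int), V.Nodup →
    (∀ e ∈ E, ∃ a b, e = [a, b] ∧ a ∈ V ∧ b ∈ V ∧ a ≠ b) →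
    (V.map (pvDegc E)).sum = 2 * E.length := by
  intro E
  induction E with
  | nil =>
      intro V _ _
      simp [show pvDegc ([] : List (List Int)) = fun _ => 0 from rfl]
  | cons e E ih =>
      intro V hnd hval
      rcases hval e (by simp) with ⟨a, b, rfl, ha, hb, hab⟩
      have hrest : ∀ e' ∈ E, ∃ a b, e' = [a, b] ∧ a ∈ V ∧ b ∈ V ∧ a ≠ b :=
        fun e' he' => hval e' (by simp [he'])
      have hsum : ∀ W : List Int, (W.map (pvDegc ([a, b] :: E))).sum
          = W.countP (fun x => a == x || b == x) + (W.map (pvDegc E)).sum := by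
        intro W
        induction W with
        | nil => simp
        | cons y W ihW =>
            simp only [List.map_cons, List.sum_cons, List.countP_cons, ihW,
              pvDegc_cons, pvIncB_pair]
            by_cases h : (a == y || b == y) = true <;> simp [h] <;> omega
      rw [hsum V, pvCountP_two V hnd hab ha hb, ih V hnd hrest]
      simp; omega

theorem pvSumLB {f : Int → Nat} : ∀ (V : List Int), (∀ x ∈ V, 2 ≤ f x) →
    2 * V.length ≤ (V.map f).sum := by
  intro V
  induction V with
  | nil => simp
  | cons y V ih =>
      intro h
      have h1 := h y (by simp)
      have h2 := ih (fun x hx => h x (by simp [hx]))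
      simp only [List.map_cons, List.sum_cons, List.length_cons]
      omega

theorem pvPeel_exists_leaf {V : List Int} {E : List (List Int)} (h : pvPeel V E)
    (h2 : 2 ≤ V.length) : ∃ x ∈ V, pvDegc E x = 1 := by
  by_contra hcon
  have hne1 : ∀ x ∈ V, pvDegc E x ≠ 1 := fun x hx h1 => hcon ⟨x, hx, h1⟩
  have hge : ∀ x ∈ V, 2 ≤ pvDegc E x := by
    intro x hx
    rcases Nat.eq_zero_or_pos (pvDegc E x) with h0 | hpos
    · have := pvPeel_deg_zero h x hx h0
      rw [this] at h2; simp at h2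
    · have := hne1 x hx; omega
  have hsum := pvSumLB V hge
  rw [pvHandshake E V (pvPeel_nodup h) (pvPeel_valid h)] at hsum
  have hlen := pvPeel_length h
  omega

-- removing ANY leaf (together with its unique incident entry) of a peel-tree leaves a peel-tree
theorem pvPeel_erase {V : List Int} {E : List (List Int)} (h : pvPeel V E) :
    ∀ x e, x ∈ V → pvDegc E x = 1 → e ∈ E → pvIncB x e = true →
      pvPeel (V.erase x) (E.erase e) := by
  induction h with
  | single v => intro x e _ _ he _; simp at he
  | step v u V₀ W₀ E₀ E' hv hu hpe hW hE ih =>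
      intro x e hx hdeg he hinc
      have hvu : v ≠ u := fun h => hv (h ▸ hu)
      have hxm : x = v ∨ x ∈ V₀ := by
        have := (hW.mem_iff).mp hx; simpa using this
      have key : ∀ a b : Int, E₀.Perm ([a, b] :: E') → ((a = v ∧ b = u) ∨ (a = u ∧ b = v)) →
          pvPeel (W₀.erase x) (E₀.erase e) := by
        intro a b h1 hor
        have hdeg' : (if pvIncB x [a, b] then 1 else 0) + pvDegc E' x = 1 := by
          rw [← pvDegc_cons, ← pvDegc_perm h1 x]; exact hdeg
        have hvalid := pvPeel_valid hpe
        have hem : e = [a, b] ∨ e ∈ E' := by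
          have := (h1.mem_iff).mp he; simpa using this
        by_cases hxv : x = v
        · subst hxv
          have hdegE' : pvDegc E' x = 0 := by
            apply List.countP_eq_zero.mpr
            intro e' he' hine'
            rcases hvalid e' he' with ⟨a', b', rfl, ha', hb', _⟩
            have : a' = x ∨ b' = x := by simpa [pvIncB_pair] using hine'
            rcases this with rfl | rfl <;> [exact hv ha'; exact hv hb']
          have hee0 : e = [a, b] := by
            rcases hem with h' | h'
            · exact h'
            · exfalso; have hp := pvDegc_pos_of_mem h' hinc; omega
          subst hee0
          have hpermV : (W₀.erase x).Perm V₀ := by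
            calc (W₀.erase x).Perm ((x :: V₀).erase x) := hW.erase x
            _ = V₀ := List.erase_cons_head x V₀
          have hpermE : (E₀.erase [a, b]).Perm E' := by
            calc (E₀.erase [a, b]).Perm (([a, b] :: E').erase [a, b]) := h1.erase _
            _ = E' := List.erase_cons_head _ E'
          exact pvPeel_perm_V (pvPeel_perm_E hpe hpermE.symm) hpermV.symm
        · have hxV₀ : x ∈ V₀ := hxm.resolve_left hxv
          have hvx : ¬ v = x := fun h => hxv h.symm
          rcases hem with hee0 | heE'
          · -- e is the top entry: then x = u and V₀ = [u]
            subst hee0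
            have hxu : x = u := by
              have h' : a = x ∨ b = x := by simpa [pvIncB_pair] using hinc
              rcases hor with ⟨rfl, rfl⟩ | ⟨rfl, rfl⟩
              · rcases h' with h' | h'
                · exact absurd h'.symm hxv
                · exact h'.symm
              · rcases h' with h' | h'
                · exact h'.symm
                · exact absurd h'.symm hxv
            have hdegE' : pvDegc E' x = 0 := by
              rw [hinc] at hdeg'; simpa using hdeg'
            have hV₀ : V₀ = [x] := pvPeel_deg_zero hpe x hxV₀ hdegE'
            have hlen := pvPeel_length hpe
            rw [hV₀] at hlen
            have hE' : E' = [] := List.length_eq_zero_iff.mp (by simpa using hlen)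
            have hpermV : (W₀.erase x).Perm [v] := by
              have h2 : W₀.Perm (v :: [x]) := by rw [← hV₀]; exact hW
              calc (W₀.erase x).Perm ((v :: [x]).erase x) := h2.erase x
              _ = [v] := by rw [List.erase_cons_tail (by simp [hvx])]; simp
            have hpermE : (E₀.erase [a, b]).Perm [] := by
              have h2 : E₀.Perm [[a, b]] := by rw [← hE']; exact h1
              calc (E₀.erase [a, b]).Perm (([a, b] :: []).erase [a, b]) := h2.erase _
              _ = [] := List.erase_cons_head _ _
            exact pvPeel_perm_V (pvPeel_perm_E (pvPeel.single v) hpermE.symm) hpermV.symm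
          · -- e sits inside the smaller tree: recurse and re-attach the top leaf
            have hxuF : x ≠ u := by
              intro hh; subst hh
              have hincx : pvIncB x [a, b] = true := by
                rcases hor with ⟨rfl, rfl⟩ | ⟨rfl, rfl⟩ <;> simp [pvIncB_pair]
              simp only [hincx, if_true] at hdeg'
              have hpos := pvDegc_pos_of_mem heE' hinc
              omega
            have hincab : pvIncB x [a, b] = false := by
              rcases hor with ⟨rfl, rfl⟩ | ⟨rfl, rfl⟩
              · exact pvIncB_pair_false hvx (fun h => absurd h.symm hxuF)
              · exact pvIncB_pair_false (fun h => absurd h.symm hxuF) hvx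
            have hdegE' : pvDegc E' x = 1 := by
              rw [hincab] at hdeg'; simpa using hdeg'
            have hrec := ih x e hxV₀ hdegE' heE' hinc
            have hne0 : ¬ [a, b] = e := by
              intro hh; rw [← hh] at hinc; rw [hinc] at hincab; simp at hincab
            refine pvPeel.step v u (V₀.erase x) (W₀.erase x) (E₀.erase e) (E'.erase e)
              (fun hh => hv (List.erase_subset hh))
              ((List.mem_erase_of_ne hxuF.symm).mpr hu) hrec ?_ ?_
            · calc (W₀.erase x).Perm ((v :: V₀).erase x) := hW.erase x
              _ = v :: V₀.erase x := List.erase_cons_tail (by simp [hvx])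
            · have hstep : (E₀.erase e).Perm (([a, b] :: E').erase e) := h1.erase e
              rw [List.erase_cons_tail (by simp [hne0])] at hstep
              rcases hor with ⟨rfl, rfl⟩ | ⟨rfl, rfl⟩
              · exact Or.inl hstep
              · exact Or.inr hstep
      rcases hE with h1 | h1
      · exact key v u h1 (Or.inl ⟨rfl, rfl⟩)
      · exact key u v h1 (Or.inr ⟨rfl, rfl⟩)

-- cutting a peel-tree at any entry [a, b] yields the two peel-trees on its sides
theorem pvPeel_split {V : List Int} {E : List (List Int)} (h : pvPeel V E) :
    ∀ a b, [a, b] ∈ E → ∃ V1 E1 V2 E2, pvPeel V1 E1 ∧ pvPeel V2 E2 ∧ a ∈ V1 ∧ b ∈ V2 ∧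
      V.Perm (V1 ++ V2) ∧ E.Perm ([a, b] :: (E1 ++ E2)) := by
  induction h with
  | single v => intro a b he; simp at he
  | step v u V₀ W₀ E₀ E' hv hu hpe hW hE ih =>
      intro a b he
      rcases hE with h1 | h1
      · rcases List.mem_cons.mp ((h1.mem_iff).mp he) with hee0 | heE'
        · obtain ⟨rfl, rfl⟩ : a = v ∧ b = u := by simpa using hee0
          exact ⟨[a], [], V₀, E', pvPeel.single a, hpe, by simp, hu,
            hW.trans (by rfl), by simpa using h1⟩
        · rcases ih a b heE' with ⟨V1, E1, V2, E2, hp1, hp2, ha1, hb2, hpV, hpE⟩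
          have hsub1 : ∀ y, y ∈ V1 → y ∈ V₀ := fun y hy => (hpV.symm.mem_iff).mp (by simp [hy])
          have hsub2 : ∀ y, y ∈ V2 → y ∈ V₀ := fun y hy => (hpV.symm.mem_iff).mp (by simp [hy])
          rcases List.mem_append.mp ((hpV.mem_iff).mp hu) with hu1 | hu2
          · refine ⟨v :: V1, [v, u] :: E1, V2, E2,
              pvPeel.step v u V1 (v :: V1) ([v, u] :: E1) E1 (fun hh => hv (hsub1 v hh)) hu1 hp1
                (List.Perm.refl _) (Or.inl (List.Perm.refl _)),
              hp2, by simp [ha1], hb2, ?_, ?_⟩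
            · exact hW.trans (hpV.cons v)
            · exact h1.trans ((hpE.cons _).trans (List.Perm.swap _ _ _))
          · refine ⟨V1, E1, v :: V2, [v, u] :: E2,
              hp1,
              pvPeel.step v u V2 (v :: V2) ([v, u] :: E2) E2 (fun hh => hv (hsub2 v hh)) hu2 hp2
                (List.Perm.refl _) (Or.inl (List.Perm.refl _)),
              ha1, by simp [hb2], ?_, ?_⟩
            · exact hW.trans ((hpV.cons v).trans List.perm_middle.symm)
            · exact h1.trans ((hpE.cons _).trans ((List.Perm.swap _ _ _).trans ((List.perm_middle.symm).cons _)))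
      · rcases List.mem_cons.mp ((h1.mem_iff).mp he) with hee0 | heE'
        · obtain ⟨rfl, rfl⟩ : a = u ∧ b = v := by simpa using hee0
          refine ⟨V₀, E', [b], [], hpe, pvPeel.single b, hu, by simp, ?_, ?_⟩
          · exact hW.trans ((List.perm_append_singleton b V₀).symm)
          · simpa using h1
        · rcases ih a b heE' with ⟨V1, E1, V2, E2, hp1, hp2, ha1, hb2, hpV, hpE⟩
          have hsub1 : ∀ y, y ∈ V1 → y ∈ V₀ := fun y hy => (hpV.symm.mem_iff).mp (by simp [hy])
          have hsub2 : ∀ y, y ∈ V2 → y ∈ V₀ := fun y hy => (hpV.symm.mem_iff).mp (by simp [hy])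
          rcases List.mem_append.mp ((hpV.mem_iff).mp hu) with hu1 | hu2
          · refine ⟨v :: V1, [u, v] :: E1, V2, E2,
              pvPeel.step v u V1 (v :: V1) ([u, v] :: E1) E1 (fun hh => hv (hsub1 v hh)) hu1 hp1
                (List.Perm.refl _) (Or.inr (List.Perm.refl _)),
              hp2, by simp [ha1], hb2, ?_, ?_⟩
            · exact hW.trans (hpV.cons v)
            · exact h1.trans ((hpE.cons _).trans (List.Perm.swap _ _ _))
          · refine ⟨V1, E1, v :: V2, [u, v] :: E2,
              hp1,
              pvPeel.step v u V2 (v :: V2) ([u, v] :: E2) E2 (fun hh => hv (hsub2 v hh)) hu2 hp2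
                (List.Perm.refl _) (Or.inr (List.Perm.refl _)),
              ha1, by simp [hb2], ?_, ?_⟩
            · exact hW.trans ((hpV.cons v).trans List.perm_middle.symm)
            · exact h1.trans ((hpE.cons _).trans ((List.Perm.swap _ _ _).trans ((List.perm_middle.symm).cons _)))

def pvFlatV (parts : List (List Int × Int × List Int × List (List Int))) : List Int :=
  parts.flatMap (fun pr => pr.2.2.1)

def pvFlatE (parts : List (List Int × Int × List Int × List (List Int))) : List (List Int) :=
  parts.flatMap (fun pr => pr.1 :: pr.2.2.2)

theorem pvNbrs_append (E1 E2 : List (List Int)) (x : Int) :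
    pvNbrs (E1 ++ E2) x = pvNbrs E1 x ++ pvNbrs E2 x := by
  simp [pvNbrs]

theorem pvNbrs_perm {E F : List (List Int)} (h : E.Perm F) (x : Int) :
    (pvNbrs E x).Perm (pvNbrs F x) := h.filterMap _

theorem pvNbrs_nil_of_valid {E : List (List Int)} {V : List Int} {x : Int}
    (hval : ∀ e ∈ E, ∃ a b, e = [a, b] ∧ a ∈ V ∧ b ∈ V ∧ a ≠ b) (hx : x ∉ V) :
    pvNbrs E x = [] := by
  induction E with
  | nil => rfl
  | cons e E ih =>
      rcases hval e (by simp) with ⟨a, b, rfl, ha, hb, _⟩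
      have hax : ¬ a = x := fun h => hx (h ▸ ha)
      have hbx : ¬ b = x := fun h => hx (h ▸ hb)
      simp only [pvNbrs, List.filterMap_cons]
      simp only [hax, hbx, if_false]
      exact ih (fun e' he' => hval e' (by simp [he']))

theorem pvFoldl_sum (L : List Int) (g : Int → Int) (a : Int) :
    L.foldl (fun s w => s + g w) a = a + (L.map g).sum := by
  induction L generalizing a with
  | nil => simp
  | cons y L ih => simp [ih]; ring

theorem pvSumV_perm (vals : List Int) {V W : List Int} (h : V.Perm W) :
    pvSumV vals V = pvSumV vals W := (h.map (pvGetI vals)).sum_eq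

theorem pvSumV_flatMap (vals : List Int) (l : List (List Int × Int × List Int × List (List Int))) :
    pvSumV vals (pvFlatV l) = (l.map (fun pr => pvSumV vals pr.2.2.1)).sum := by
  induction l with
  | nil => simp [pvFlatV, pvSumV]
  | cons pr l ih => simp [pvFlatV, pvSumV, List.flatMap_cons] at ih ⊢; omega

-- a peel-tree decomposes, at any vertex x, into x's incident entries and the pendant subtrees behind them
theorem pvDecomp {V : List Int} {E₀ : List (List Int)} (h : pvPeel V E₀) :
    ∀ x ∈ V, ∃ parts : List (List Int × Int × List Int × List (List Int)),
      (∀ pr ∈ parts, (pr.1 = [x, pr.2.1] ∨ pr.1 = [pr.2.1, x]) ∧ pvPeel pr.2.2.1 pr.2.2.2 ∧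
        pr.2.1 ∈ pr.2.2.1 ∧ x ∉ pr.2.2.1) ∧
      V.Perm (x :: pvFlatV parts) ∧ E₀.Perm (pvFlatE parts) := by
  induction h with
  | single v =>
      intro x hx
      have hxv : x = v := by simpa using hx
      subst hxv
      exact ⟨[], by simp, by simp [pvFlatV], by simp [pvFlatE]⟩
  | step v u V₀ W₀ E₀ E' hv hu hpe hW hE ih =>
      intro x hx
      have hxm : x = v ∨ x ∈ V₀ := by
        have := (hW.mem_iff).mp hx; simpa using this
      have key : ∀ e0 : List Int, E₀.Perm (e0 :: E') → (e0 = [v, u] ∨ e0 = [u, v]) →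
          ∃ parts, (∀ pr ∈ parts, (pr.1 = [x, pr.2.1] ∨ pr.1 = [pr.2.1, x]) ∧ pvPeel pr.2.2.1 pr.2.2.2 ∧
            pr.2.1 ∈ pr.2.2.1 ∧ x ∉ pr.2.2.1) ∧
          W₀.Perm (x :: pvFlatV parts) ∧ E₀.Perm (pvFlatE parts) := by
        intro e0 h1 hor
        by_cases hxv : x = v
        · subst hxv
          refine ⟨[(e0, u, V₀, E')], ?_, ?_, ?_⟩
          · intro pr hpr
            simp only [List.mem_singleton] at hpr
            subst hpr
            refine ⟨?_, hpe, hu, hv⟩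
            rcases hor with rfl | rfl
            · exact Or.inl rfl
            · exact Or.inr rfl
          · simpa [pvFlatV] using hW
          · simpa [pvFlatE] using h1
        · have hxV₀ : x ∈ V₀ := hxm.resolve_left hxv
          rcases ih x hxV₀ with ⟨parts', hprops, hVp, hEp⟩
          have hsubV : ∀ y, y ∈ pvFlatV parts' → y ∈ V₀ :=
            fun y hy => (hVp.symm.mem_iff).mp (by simp [hy])
          have hum : u = x ∨ u ∈ pvFlatV parts' := by
            have := (hVp.mem_iff).mp hu; simpa using this
          rcases hum with rfl | humF
          · -- v hangs directly off x: one new single-vertex part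
            refine ⟨(e0, v, [v], []) :: parts', ?_, ?_, ?_⟩
            · intro pr hpr
              rcases List.mem_cons.mp hpr with rfl | hpr'
              · refine ⟨?_, pvPeel.single v, by simp, by simpa using hxv⟩
                rcases hor with rfl | rfl
                · exact Or.inr rfl
                · exact Or.inl rfl
              · exact hprops pr hpr'
            · have hstep : W₀.Perm (u :: (v :: pvFlatV parts')) :=
                hW.trans ((hVp.cons v).trans (List.Perm.swap u v _))
              have heq : pvFlatV ((e0, v, [v], []) :: parts') = v :: pvFlatV parts' := by
                simp [pvFlatV]
              rw [heq]; exact hstep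
            · have heq : pvFlatE ((e0, v, [v], []) :: parts') = e0 :: pvFlatE parts' := by
                simp [pvFlatE]
              rw [heq]; exact h1.trans (hEp.cons e0)
          · -- v hangs inside the subtree that contains u: extend that part by the leaf v
            rcases List.mem_flatMap.mp humF with ⟨pr₀, hpr₀, hupr⟩
            rcases List.append_of_mem hpr₀ with ⟨L1, L2, rfl⟩
            obtain ⟨e₀p, w₀, V₀p, E₀p⟩ := pr₀
            have hvV₀p : v ∉ V₀p := fun hh => hv (hsubV v (by simp [pvFlatV, hh]))
            have hpeel₀ := (hprops (e₀p, w₀, V₀p, E₀p) (by simp)).2.1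
            have hnew : pvPeel (v :: V₀p) (e0 :: E₀p) := by
              refine pvPeel.step v u V₀p (v :: V₀p) (e0 :: E₀p) E₀p hvV₀p hupr hpeel₀
                (List.Perm.refl _) ?_
              rcases hor with rfl | rfl
              · exact Or.inl (List.Perm.refl _)
              · exact Or.inr (List.Perm.refl _)
            refine ⟨L1 ++ (e₀p, w₀, v :: V₀p, e0 :: E₀p) :: L2, ?_, ?_, ?_⟩
            · intro pr hpr
              rcases List.mem_append.mp hpr with hpr' | hpr'
              · exact hprops pr (by simp [hpr'])
              · rcases List.mem_cons.mp hpr' with rfl | hpr''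
                · have hfacts := hprops (e₀p, w₀, V₀p, E₀p) (by simp)
                  refine ⟨hfacts.1, hnew, by simp [hfacts.2.2.1], ?_⟩
                  simp only [List.mem_cons, not_or]
                  exact ⟨hxv, hfacts.2.2.2⟩
                · exact hprops pr (by simp [hpr''])
            · have hflat : pvFlatV (L1 ++ (e₀p, w₀, v :: V₀p, e0 :: E₀p) :: L2)
                  = pvFlatV L1 ++ (v :: V₀p) ++ pvFlatV L2 := by
                simp [pvFlatV, List.flatMap_append]
              have hflat' : pvFlatV (L1 ++ (e₀p, w₀, V₀p, E₀p) :: L2)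
                  = pvFlatV L1 ++ V₀p ++ pvFlatV L2 := by
                simp [pvFlatV, List.flatMap_append]
              rw [hflat]
              have s1 : W₀.Perm (v :: (x :: (pvFlatV L1 ++ V₀p ++ pvFlatV L2))) := by
                have := hVp; rw [hflat'] at this; exact hW.trans (this.cons v)
              have s2 : (v :: (x :: (pvFlatV L1 ++ V₀p ++ pvFlatV L2))).Perm
                  (x :: (v :: (pvFlatV L1 ++ V₀p ++ pvFlatV L2))) := List.Perm.swap x v _
              have s3 : (v :: (pvFlatV L1 ++ V₀p ++ pvFlatV L2)).Perm
                  (pvFlatV L1 ++ (v :: V₀p) ++ pvFlatV L2) := by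
                simpa [List.append_assoc] using
                  (List.perm_middle (a := v) (l₁ := pvFlatV L1) (l₂ := V₀p ++ pvFlatV L2)).symm
              exact s1.trans (s2.trans (s3.cons x))
            · have hflatE : pvFlatE (L1 ++ (e₀p, w₀, v :: V₀p, e0 :: E₀p) :: L2)
                  = pvFlatE L1 ++ (e₀p :: e0 :: E₀p) ++ pvFlatE L2 := by
                simp [pvFlatE, List.flatMap_append]
              have hflatE' : pvFlatE (L1 ++ (e₀p, w₀, V₀p, E₀p) :: L2)
                  = pvFlatE L1 ++ (e₀p :: E₀p) ++ pvFlatE L2 := by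
                simp [pvFlatE, List.flatMap_append]
              rw [hflatE]
              have s0 : E₀.Perm (e0 :: (pvFlatE L1 ++ (e₀p :: E₀p) ++ pvFlatE L2)) := by
                have := hEp; rw [hflatE'] at this; exact h1.trans (this.cons e0)
              have s1 : (e0 :: (pvFlatE L1 ++ (e₀p :: E₀p) ++ pvFlatE L2)).Perm
                  (pvFlatE L1 ++ (e0 :: e₀p :: E₀p) ++ pvFlatE L2) := by
                simpa [List.append_assoc] using
                  (List.perm_middle (a := e0) (l₁ := pvFlatE L1)
                    (l₂ := e₀p :: E₀p ++ pvFlatE L2)).symm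
              have s2 : (pvFlatE L1 ++ (e0 :: e₀p :: E₀p) ++ pvFlatE L2).Perm
                  (pvFlatE L1 ++ (e₀p :: e0 :: E₀p) ++ pvFlatE L2) :=
                List.Perm.append (List.Perm.append_left (pvFlatE L1) (List.Perm.swap e₀p e0 E₀p))
                  (List.Perm.refl _)
              exact s0.trans (s1.trans s2)
      rcases hE with h1 | h1
      · exact key [v, u] h1 (Or.inl rfl)
      · exact key [u, v] h1 (Or.inr rfl)

-- entries outside the current subtree that the DFS from x (with parent p) may see without harm
def pvExtOK (V : List Int) (x p : Int) (e : List Int) : Prop :=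
  ∃ a b, e = [a, b] ∧ ((a ∉ V ∧ b ∉ V) ∨ (a = x ∧ b = p) ∨ (a = p ∧ b = x))

theorem pvNbrs_ext_all_p {V : List Int} {Eext : List (List Int)} {x p : Int}
    (hx : x ∈ V) (hp : p ∉ V) (hext : ∀ e ∈ Eext, pvExtOK V x p e) :
    ∀ y ∈ pvNbrs Eext x, y = p := by
  intro y hy
  rcases List.mem_filterMap.mp hy with ⟨e, he, hmk⟩
  rcases hext e he with ⟨a, b, rfl, hcase⟩
  have hpx : p ≠ x := fun h => hp (h ▸ hx)
  rcases hcase with ⟨haV, hbV⟩ | ⟨rfl, rfl⟩ | ⟨rfl, rfl⟩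
  · have hax : ¬ a = x := fun h => haV (h ▸ hx)
    have hbx : ¬ b = x := fun h => hbV (h ▸ hx)
    simp [hax, hbx] at hmk
  · simp at hmk; omega
  · simp [hpx] at hmk; omega

theorem pvNbrs_flatE {parts : List (List Int × Int × List Int × List (List Int))} {x : Int}
    (hprops : ∀ pr ∈ parts, (pr.1 = [x, pr.2.1] ∨ pr.1 = [pr.2.1, x]) ∧ pvPeel pr.2.2.1 pr.2.2.2 ∧
      pr.2.1 ∈ pr.2.2.1 ∧ x ∉ pr.2.2.1) :
    pvNbrs (pvFlatE parts) x = parts.map (fun pr => pr.2.1) := by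
  induction parts with
  | nil => rfl
  | cons pr l ih =>
      rcases hprops pr (by simp) with ⟨hor, hpeel, hw, hxn⟩
      have hflat : pvFlatE (pr :: l) = (pr.1 :: pr.2.2.2) ++ pvFlatE l := by
        simp [pvFlatE]
      rw [hflat, pvNbrs_append]
      have h1 : pvNbrs (pr.1 :: pr.2.2.2) x = [pr.2.1] := by
        have hE : pvNbrs pr.2.2.2 x = [] :=
          pvNbrs_nil_of_valid (pvPeel_valid hpeel) hxn
        have hwx : ¬ pr.2.1 = x := fun h => hxn (h ▸ hw)
        rcases hor with h' | h' <;>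
          · rw [show pvNbrs (pr.1 :: pr.2.2.2) x = pvNbrs [pr.1] x ++ pvNbrs pr.2.2.2 x from
              (pvNbrs_append [pr.1] pr.2.2.2 x).symm ▸ rfl, hE]
            simp [pvNbrs, h', hwx]
      rw [h1, ih (fun pr' hpr' => hprops pr' (by simp [hpr']))]
      simp

-- THE side-sum lemma: on a peel-tree, the DFS from x avoiding an outside parent p sums the whole tree,
-- and extra entries of shape pvExtOK do not disturb it
theorem pvSS : ∀ (N : Nat) (V : List Int) (E₀ Eext E : List (List Int)) (vals : List Int)
    (x p : Int) (f : Nat),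
    V.length ≤ N → pvPeel V E₀ → x ∈ V → p ∉ V → E.Perm (E₀ ++ Eext) →
    (∀ e ∈ Eext, pvExtOK V x p e) → V.length ≤ f →
    pvSideSum E vals f x p = pvSumV vals V := by
  intro N
  induction N with
  | zero =>
      intro V E₀ Eext E vals x p f hN _ hx _ _ _ _
      have := List.length_pos_of_mem hx
      omega
  | succ N ih =>
      intro V E₀ Eext E vals x p f hN hpeel hx hp hEperm hext hf
      have hpos := List.length_pos_of_mem hx
      obtain ⟨f', rfl⟩ : ∃ f', f = f' + 1 := by
        cases f with
        | zero => omega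
        | succ f' => exact ⟨f', rfl⟩
      rcases pvDecomp hpeel x hx with ⟨parts, hprops, hVperm, hE0perm⟩
      -- the filtered neighbour list is (up to permutation) the subtree roots
      have hsubVflat : ∀ y, y ∈ pvFlatV parts → y ∈ V :=
        fun y hy => (hVperm.symm.mem_iff).mp (by simp [hy])
      have hch : ((pvNbrs E x).filter (fun w => decide (w ≠ p))).Perm
          (parts.map (fun pr => pr.2.1)) := by
        have h1 : (pvNbrs E x).Perm (pvNbrs E₀ x ++ pvNbrs Eext x) := by
          have := pvNbrs_perm hEperm x
          rwa [pvNbrs_append] at this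
        have h2 := h1.filter (fun w => decide (w ≠ p))
        rw [List.filter_append] at h2
        have h3 : (pvNbrs Eext x).filter (fun w => decide (w ≠ p)) = [] := by
          apply List.filter_eq_nil_iff.mpr
          intro y hy
          have := pvNbrs_ext_all_p hx hp hext y hy
          simp [this]
        have h4 : ((pvNbrs E₀ x).filter (fun w => decide (w ≠ p))).Perm
            (parts.map (fun pr => pr.2.1)) := by
          have h5 := (pvNbrs_perm hE0perm x).filter (fun w => decide (w ≠ p))
          rw [pvNbrs_flatE hprops] at h5
          have h6 : (parts.map (fun pr => pr.2.1)).filter (fun w => decide (w ≠ p))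
              = parts.map (fun pr => pr.2.1) := by
            apply List.filter_eq_self.mpr
            intro w hw
            rcases List.mem_map.mp hw with ⟨pr, hpr, rfl⟩
            have hwV : pr.2.1 ∈ V :=
              hsubVflat _ (List.mem_flatMap.mpr ⟨pr, hpr, (hprops pr hpr).2.2.1⟩)
            simp
            exact fun h => hp (h ▸ hwV)
          rw [h6] at h5
          exact h5
        rw [h3] at h2
        exact (h2.trans (List.Perm.refl _)).trans ((List.append_nil _) ▸ h4)
      -- each subtree root's recursive call sums its subtree
      have hndV : V.Nodup := pvPeel_nodup hpeel
      have hlenflat : (pvFlatV parts).length + 1 = V.length := by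
        have := hVperm.length_eq; simp at this; omega
      have hrec : ∀ pr ∈ parts,
          pvSideSum E vals f' pr.2.1 x = pvSumV vals pr.2.2.1 := by
        intro pr hpr
        rcases List.append_of_mem hpr with ⟨L1, L2, rfl⟩
        rcases hprops pr (by simp) with ⟨hor, hpeelp, hwp, hxp⟩
        have hflat : pvFlatV (L1 ++ pr :: L2) = pvFlatV L1 ++ pr.2.2.1 ++ pvFlatV L2 := by
          simp [pvFlatV, List.flatMap_append]
        have hflatE : pvFlatE (L1 ++ pr :: L2)
            = pvFlatE L1 ++ (pr.1 :: pr.2.2.2) ++ pvFlatE L2 := by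
          simp [pvFlatE, List.flatMap_append]
        -- distinctness: nothing outside this part's vertex list meets it
        have hnd2 : (x :: (pvFlatV L1 ++ pr.2.2.1 ++ pvFlatV L2)).Nodup := by
          have := (hVperm.nodup_iff).mp hndV
          rwa [hflat] at this
        have hdisj : ∀ y, y ∈ pr.2.2.1 → (y ∉ pvFlatV L1 ∧ y ∉ pvFlatV L2 ∧ y ≠ x) := by
          intro y hy
          have hcnt := List.nodup_iff_count_le_one.mp hnd2 y
          have hyc : 0 < (pr.2.2.1).count y := List.count_pos_iff.mpr hy
          simp only [List.count_cons, List.count_append] at hcnt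
          refine ⟨?_, ?_, ?_⟩
          · intro hyl; have := List.count_pos_iff.mpr hyl; omega
          · intro hyl; have := List.count_pos_iff.mpr hyl; omega
          · intro hyl; subst hyl; simp at hcnt; omega
        have hsubVpr : ∀ y, y ∈ pr.2.2.1 → y ∈ V := by
          intro y hy
          exact hsubVflat y (by rw [hflat]; simp [hy])
        -- the edge multiset splits as this part's subtree edges plus harmless extras
        have hEperm' : E.Perm (pr.2.2.2 ++ (pr.1 :: (pvFlatE L1 ++ pvFlatE L2 ++ Eext))) := by
          have hb : E.Perm (pvFlatE (L1 ++ pr :: L2) ++ Eext) :=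
            hEperm.trans (hE0perm.append_right Eext)
          rw [hflatE] at hb
          refine hb.trans ?_
          apply List.perm_iff_count.mpr
          intro a
          simp only [List.count_append, List.count_cons]
          omega
        have hext' : ∀ e ∈ (pr.1 :: (pvFlatE L1 ++ pvFlatE L2 ++ Eext)),
            pvExtOK pr.2.2.1 pr.2.1 x e := by
          intro e he
          rcases List.mem_cons.mp he with rfl | he'
          · rcases hor with h' | h'
            · exact ⟨x, pr.2.1, h', Or.inr (Or.inr ⟨rfl, rfl⟩)⟩
            · exact ⟨pr.2.1, x, h', Or.inr (Or.inl ⟨rfl, rfl⟩)⟩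
          · have hof : ∀ (L : List (List Int × Int × List Int × List (List Int))),
                (∀ pr' ∈ L, pr' ∈ L1 ∨ pr' ∈ L2) → e ∈ pvFlatE L → pvExtOK pr.2.2.1 pr.2.1 x e := by
              intro L hLmem heL
              rcases List.mem_flatMap.mp heL with ⟨pr', hpr', hepr'⟩
              have hpr'props := hprops pr' (by rcases hLmem pr' hpr' with h | h <;> simp [h])
              have hVdisj : ∀ y, y ∈ pr'.2.2.1 → y ∉ pr.2.2.1 := by
                intro y hy hy2
                rcases hLmem pr' hpr' with hL | hL
                · exact (hdisj y hy2).1 (List.mem_flatMap.mpr ⟨pr', hL, hy⟩)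
                · exact (hdisj y hy2).2.1 (List.mem_flatMap.mpr ⟨pr', hL, hy⟩)
              rcases List.mem_cons.mp hepr' with rfl | heE'
              · rcases hpr'props.1 with h' | h'
                · exact ⟨x, pr'.2.1, h', Or.inl ⟨(hdisj _ · |>.2.2 rfl), hVdisj _ hpr'props.2.2.1⟩⟩
                · exact ⟨pr'.2.1, x, h', Or.inl ⟨hVdisj _ hpr'props.2.2.1, (hdisj _ · |>.2.2 rfl)⟩⟩
              · rcases pvPeel_valid hpr'props.2.1 e heE' with ⟨a, b, rfl, ha, hb, _⟩
                exact ⟨a, b, rfl, Or.inl ⟨hVdisj a ha, hVdisj b hb⟩⟩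
            rcases List.mem_append.mp he' with he'' | he''
            · rcases List.mem_append.mp he'' with h3 | h3
              · exact hof L1 (fun pr' h => Or.inl h) h3
              · exact hof L2 (fun pr' h => Or.inr h) h3
            · rcases hext e he'' with ⟨a, b, rfl, hcase⟩
              refine ⟨a, b, rfl, Or.inl ?_⟩
              rcases hcase with ⟨haV, hbV⟩ | ⟨rfl, rfl⟩ | ⟨rfl, rfl⟩
              · exact ⟨fun h => haV (hsubVpr a h), fun h => hbV (hsubVpr b h)⟩
              · exact ⟨(hdisj _ · |>.2.2 rfl), fun h => hp (hsubVpr b h)⟩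
              · exact ⟨fun h => hp (hsubVpr a h), (hdisj _ · |>.2.2 rfl)⟩
        have hlenpr : pr.2.2.1.length ≤ (pvFlatV (L1 ++ pr :: L2)).length := by
          rw [hflat]; simp [List.length_append]; omega
        exact ih pr.2.2.1 pr.2.2.2 _ E vals pr.2.1 x f' (by omega) hpeelp hwp hxp hEperm' hext'
          (by omega)
      -- assemble
      have hgoal : pvSideSum E vals (f' + 1) x p
          = pvGetI vals x + (((pvNbrs E x).filter (fun w => decide (w ≠ p))).map
              (fun w => pvSideSum E vals f' w x)).sum := by
        simp only [pvSideSum]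
        rw [pvFoldl_sum]
        simp
      rw [hgoal, ((hch.map (fun w => pvSideSum E vals f' w x)).sum_eq), List.map_map]
      have hmapc : parts.map ((fun w => pvSideSum E vals f' w x) ∘ (fun pr => pr.2.1))
          = parts.map (fun pr => pvSumV vals pr.2.2.1) :=
        List.map_congr_left (fun pr hpr => hrec pr hpr)
      rw [hmapc, ← pvSumV_flatMap]
      have hfin : pvSumV vals V = pvGetI vals x + pvSumV vals (pvFlatV parts) := by
        rw [pvSumV_perm vals hVperm]; simp [pvSumV]
      omega

def pvInd (Eref : List (List Int)) (vals : List Int) (f : Nat) (k : Int) (e : List Int) : Int :=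
  match e with
  | [u, v] => if PySem.Int.mod (pvSideSum Eref vals f u v) k = 0 then 1 else 0
  | _ => 0

theorem pvFoldl_count (Eref : List (List Int)) (vals : List Int) (f : Nat) (k : Int) :
    ∀ (L : List (List Int)) (c : Int),
    L.foldl (fun c e => match e with
      | [u, v] => if PySem.Int.mod (pvSideSum Eref vals f u v) k = 0 then c + 1 else c
      | _ => c) c = c + (L.map (pvInd Eref vals f k)).sum := by
  intro L
  induction L with
  | nil => simp
  | cons e L ih =>
      intro c
      match e with
      | [] => simp [ih, pvInd]
      | [u] => simp [ih, pvInd]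
      | u :: v :: w :: r => simp [ih, pvInd]
      | [u, v] =>
          simp only [List.foldl_cons, List.map_cons, List.sum_cons, pvInd]
          by_cases h : PySem.Int.mod (pvSideSum Eref vals f u v) k = 0 <;> simp [h, ih] <;> ring

theorem pvCount_eq (E : List (List Int)) (vals : List Int) (f : Nat) (k : Int) :
    pvCount E vals f k = (E.map (pvInd E vals f k)).sum := by
  unfold pvCount
  rw [pvFoldl_count]
  simp

theorem pvSum_shift (a0 : Int) (f g : Int → Int) :
    ∀ (L : List Int) (u : Int), L.Nodup → u ∈ L → (∀ w ∈ L, g w = if w = u then f w + a0 else f w) →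
    (L.map g).sum = (L.map f).sum + a0 := by
  intro L
  induction L with
  | nil => intro u _ hu; simp at hu
  | cons y L ih =>
      intro u hnd hu hfg
      rcases List.mem_cons.mp hu with rfl | huL
      · have hgf : ∀ w ∈ L, g w = f w := by
          intro w hw
          have hwu : w ≠ u := fun h => (List.nodup_cons.mp hnd).1 (h ▸ hw)
          rw [hfg w (by simp [hw]), if_neg hwu]
        have hmap : L.map g = L.map f := List.map_congr_left hgf
        simp [hfg u (by simp), hmap]; ring
      · have hyu : y ≠ u := fun h => (List.nodup_cons.mp hnd).1 (h ▸ huL)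
        have := ih u (List.nodup_cons.mp hnd).2 huL (fun w hw => hfg w (by simp [hw]))
        simp [hfg y (by simp), hyu, this]; ring

theorem pvSum_congr {f g : Int → Int} :
    ∀ (L : List Int), (∀ w ∈ L, g w = f w) → (L.map g).sum = (L.map f).sum := by
  intro L h; rw [List.map_congr_left h]

theorem pvSumV_erase (vals : List Int) {V : List Int} {v : Int} (hv : v ∈ V) :
    pvSumV vals (V.erase v) = pvSumV vals V - pvGetI vals v := by
  have := pvSumV_perm vals (List.perm_cons_erase hv)
  simp [pvSumV] at this ⊢
  omega

theorem pvMod_shift {k s t : Int} (h : k ∣ (t - s)) :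
    (PySem.Int.mod s k = 0) = (PySem.Int.mod t k = 0) := by
  have : (k ∣ s) ↔ (k ∣ t) := by
    constructor <;> intro h2
    · have := dvd_add h h2; simpa using this
    · have := dvd_sub h2 h; simpa using this
  rw [PySem.Int.mod_eq_zero_iff_dvd, PySem.Int.mod_eq_zero_iff_dvd]
  exact propext this

theorem pvDisjoint_sides {V V1 V2 : List Int} (h : V.Perm (V1 ++ V2)) (hnd : V.Nodup) :
    ∀ y ∈ V2, y ∉ V1 := by
  intro y hy2 hy1
  have hnd2 : (V1 ++ V2).Nodup := (h.nodup_iff).mp hnd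
  exact (List.disjoint_of_nodup_append hnd2) hy1 hy2

-- a split's a-side evaluates the DFS call of the entry [a, b]
theorem pvSplit_eval {V : List Int} {E'' : List (List Int)} (hpeel : pvPeel V E'') {a b : Int}
    (he : [a, b] ∈ E'') (vals : List Int) (f : Nat) (hf : V.length ≤ f) :
    ∃ V1 E1 V2 E2, pvPeel V1 E1 ∧ pvPeel V2 E2 ∧ a ∈ V1 ∧ b ∈ V2 ∧ V.Perm (V1 ++ V2) ∧
      E''.Perm ([a, b] :: (E1 ++ E2)) ∧ pvSideSum E'' vals f a b = pvSumV vals V1 := by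
  rcases pvPeel_split hpeel a b he with ⟨V1, E1, V2, E2, hp1, hp2, ha1, hb2, hpV, hpE⟩
  have hndV := pvPeel_nodup hpeel
  have hdisj := pvDisjoint_sides hpV hndV
  refine ⟨V1, E1, V2, E2, hp1, hp2, ha1, hb2, hpV, hpE, ?_⟩
  have hb1 : b ∉ V1 := hdisj b hb2
  have hperm : E''.Perm (E1 ++ ([a, b] :: E2)) := by
    refine hpE.trans ?_
    apply List.perm_iff_count.mpr
    intro x
    simp only [List.count_append, List.count_cons]
    omega
  have hlen1 : V1.length ≤ V.length := by
    have := hpV.length_eq; simp at this; omega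
  refine pvSS V1.length V1 E1 ([a, b] :: E2) E'' vals a b f le_rfl hp1 ha1 hb1 hperm ?_ (by omega)
  intro e he'
  rcases List.mem_cons.mp he' with rfl | he2
  · exact ⟨a, b, rfl, Or.inr (Or.inl ⟨rfl, rfl⟩)⟩
  · rcases pvPeel_valid hp2 e he2 with ⟨a', b', rfl, ha', hb', _⟩
    exact ⟨a', b', rfl, Or.inl ⟨hdisj a' ha', hdisj b' hb'⟩⟩

-- THE recurrence: removing a leaf v (propagating its residue into u) loses exactly
-- the indicator of v's own entry from the per-edge count
theorem pvMrec {V : List Int} {E'' : List (List Int)} {k : Int} (hpeel : pvPeel V E'') {v u : Int}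
    {e0 : List Int}
    (hvV : v ∈ V) (hdeg : pvDegc E'' v = 1) (he0 : e0 ∈ E'')
    (hor : e0 = [v, u] ∨ e0 = [u, v]) (hne : u ≠ v)
    (vals vals' : List Int) (a0 : Int)
    (ha : a0 = if PySem.Int.mod (pvGetI vals v) k = 0 then 0 else pvGetI vals v)
    (hval' : ∀ w ∈ V, pvGetI vals' w = if w = u then pvGetI vals u + a0 else pvGetI vals w)
    (htot : k ∣ pvSumV vals V)
    (f : Nat) (hf : V.length ≤ f) :
    pvCount E'' vals f k
      = (if PySem.Int.mod (pvGetI vals v) k = 0 then 1 else 0)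
        + pvCount (E''.erase e0) vals' f k := by
  have hndV := pvPeel_nodup hpeel
  have hvalid := pvPeel_valid hpeel
  have hince0 : pvIncB v e0 = true := by
    rcases hor with rfl | rfl <;> simp [pvIncB_pair]
  have hkadv : k ∣ (a0 - pvGetI vals v) := by
    by_cases h : PySem.Int.mod (pvGetI vals v) k = 0
    · rw [ha, if_pos h]
      have := (PySem.Int.mod_eq_zero_iff_dvd _ _).mp h
      rw [zero_sub]
      exact dvd_neg.mpr this
    · rw [ha, if_neg h]; simp
  have hpermE : E''.Perm (e0 :: E''.erase e0) := List.perm_cons_erase he0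
  have hnoinc : ∀ e ∈ E''.erase e0, pvIncB v e = false := by
    have hcp : pvDegc (e0 :: E''.erase e0) v = 1 := by
      rw [← pvDegc_perm hpermE v]; exact hdeg
    rw [pvDegc_cons, hince0] at hcp
    simp at hcp
    intro e he
    have := List.countP_eq_zero.mp hcp e he
    simpa using this
  have hvper : V.length ≥ 1 := List.length_pos_of_mem hvV
  -- head indicator
  have hhead : pvInd E'' vals f k e0 = (if PySem.Int.mod (pvGetI vals v) k = 0 then 1 else 0) := by
    rcases hor with rfl | rfl
    · -- entry [v, u]: the v-side is the single vertex v
      have hss : pvSideSum E'' vals f v u = pvGetI vals v := by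
        have hext : ∀ e ∈ E'', pvExtOK [v] v u e := by
          intro e he
          by_cases hie : pvIncB v e = true
          · have hee0 : e = [v, u] := by
              rcases List.mem_cons.mp ((hpermE.mem_iff).mp he) with h' | h'
              · exact h'
              · rw [hnoinc e h'] at hie; simp at hie
            exact ⟨v, u, hee0, Or.inr (Or.inl ⟨rfl, rfl⟩)⟩
          · rcases hvalid e he with ⟨a', b', rfl, _, _, _⟩
            have hne2 : ¬ a' = v ∧ ¬ b' = v := by
              constructor <;> intro hh <;> exact hie (by simp [pvIncB_pair, hh])
            refine ⟨a', b', rfl, Or.inl ⟨?_, ?_⟩⟩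
            · simpa using hne2.1
            · simpa using hne2.2
        have := pvSS 1 [v] [] E'' E'' vals v u f (by simp) (pvPeel.single v) (by simp)
          (by simpa using hne) (by simp) hext (by simp; omega)
        simpa [pvSumV] using this
      simp [pvInd, hss]
    · -- entry [u, v]: the u-side is everything but v
      rcases pvSplit_eval hpeel he0 vals f hf with ⟨V1, E1, V2, E2, hp1, hp2, hu1, hv2, hpV, hpE, hss⟩
      have hV2 : V2 = [v] := by
        apply pvPeel_deg_zero hp2 v hv2
        have hcnt : pvDegc E'' v = (if pvIncB v [u, v] then 1 else 0) + (pvDegc E1 v + pvDegc E2 v) := by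
          rw [pvDegc_perm hpE v, pvDegc_cons]
          simp [pvDegc, List.countP_append]
        rw [hdeg] at hcnt
        simp [pvIncB_pair] at hcnt
        omega
      have hsum1 : pvSumV vals V1 = pvSumV vals V - pvGetI vals v := by
        have := pvSumV_perm vals hpV
        rw [hV2] at this
        simp [pvSumV, List.sum_append] at this ⊢
        omega
      have heq : (PySem.Int.mod (pvSideSum E'' vals f u v) k = 0)
          = (PySem.Int.mod (pvGetI vals v) k = 0) := by
        rw [hss, hsum1, PySem.Int.mod_eq_zero_iff_dvd, PySem.Int.mod_eq_zero_iff_dvd]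
        apply propext
        constructor
        · intro h2
          have := dvd_sub htot h2
          simpa using this
        · intro h2
          exact dvd_sub htot h2
      simp only [pvInd, heq]
  -- per-entry equality on the remaining entries
  have hentry : ∀ e ∈ E''.erase e0,
      pvInd E'' vals f k e = pvInd (E''.erase e0) vals' f k e := by
    intro e heer
    have he'' : e ∈ E'' := List.erase_subset heer
    rcases hvalid e he'' with ⟨a, b, rfl, haV, hbV, hab⟩
    have hince : pvIncB v [a, b] = false := hnoinc _ heer
    have hav : ¬ a = v := fun hh => by simp [pvIncB_pair, hh] at hince
    have hbv : ¬ b = v := fun hh => by simp [pvIncB_pair, hh] at hince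
    rcases pvSplit_eval hpeel he'' vals f hf with ⟨V1, E1, V2, E2, hp1, hp2, ha1, hb2, hpV, hpE, hss⟩
    have hdisj := pvDisjoint_sides hpV hndV
    have hlen1 : V1.length ≤ V.length := by
      have := hpV.length_eq; simp at this; omega
    have he0ne : e0 ≠ [a, b] := by
      intro hh; rw [hh] at hince0; rw [hince0] at hince; simp at hince
    have he0mem : e0 ∈ E1 ++ E2 := by
      rcases List.mem_cons.mp ((hpE.mem_iff).mp he0) with hh | hh
      · exact absurd hh he0ne
      · exact hh
    have hcnt : pvDegc E'' v = pvDegc E1 v + pvDegc E2 v := by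
      rw [pvDegc_perm hpE v, pvDegc_cons, hince]
      simp [pvDegc, List.countP_append]
    rcases List.mem_append.mp he0mem with he01 | he02
    · -- v and u live on the a-side
      have hd1pos := pvDegc_pos_of_mem he01 hince0
      have hd1 : pvDegc E1 v = 1 := by omega
      rcases pvPeel_valid hp1 e0 he01 with ⟨a', b', he0ab, ha', hb', _⟩
      have hvuV1 : v ∈ V1 ∧ u ∈ V1 := by
        rcases hor with rfl | rfl
        · obtain ⟨rfl, rfl⟩ : a' = v ∧ b' = u := by
            have := he0ab; simp at this; exact ⟨this.1.symm, this.2.symm⟩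
          exact ⟨ha', hb'⟩
        · obtain ⟨rfl, rfl⟩ : a' = u ∧ b' = v := by
            have := he0ab; simp at this; exact ⟨this.1.symm, this.2.symm⟩
          exact ⟨hb', ha'⟩
      have hp1' : pvPeel (V1.erase v) (E1.erase e0) :=
        pvPeel_erase hp1 v e0 hvuV1.1 hd1 he01 hince0
      have haer : a ∈ V1.erase v := (List.mem_erase_of_ne hav).mpr ha1
      have hperm' : (E''.erase e0).Perm ((E1.erase e0) ++ ([a, b] :: E2)) := by
        apply List.perm_iff_count.mpr
        intro x
        have hc := (List.perm_iff_count.mp hpE) x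
        simp only [List.count_append, List.count_cons] at hc
        rw [List.count_append, List.count_cons, List.count_erase, List.count_erase, hc]
        have h1 : (if e0 == x then 1 else 0) ≤ E1.count x := by
          by_cases hex : e0 = x
          · subst hex
            have := List.count_pos_iff.mpr he01
            simpa using this
          · have : (e0 == x) = false := by simpa using hex
            simp [this]
        omega
      have hss' : pvSideSum (E''.erase e0) vals' f a b = pvSumV vals' (V1.erase v) := by
        refine pvSS (V1.erase v).length (V1.erase v) (E1.erase e0) ([a, b] :: E2) _ vals' a b f
          le_rfl hp1' haer (fun hh => hdisj b hb2 (List.erase_subset hh)) hperm' ?_ ?_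
        · intro e' he'
          rcases List.mem_cons.mp he' with rfl | he2
          · exact ⟨a, b, rfl, Or.inr (Or.inl ⟨rfl, rfl⟩)⟩
          · rcases pvPeel_valid hp2 e' he2 with ⟨a', b', rfl, ha', hb', _⟩
            exact ⟨a', b', rfl, Or.inl ⟨fun hh => hdisj a' ha' (List.erase_subset hh),
              fun hh => hdisj b' hb' (List.erase_subset hh)⟩⟩
        · have := List.length_erase_of_mem hvuV1.1
          omega
      have huer : u ∈ V1.erase v := (List.mem_erase_of_ne hne).mpr hvuV1.2
      have hnd1 : (V1.erase v).Nodup := (pvPeel_nodup hp1).erase v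
      have hsumshift : pvSumV vals' (V1.erase v) = pvSumV vals (V1.erase v) + a0 :=
        pvSum_shift a0 (pvGetI vals) (pvGetI vals') (V1.erase v) u hnd1 huer
          (fun w hw => by
            have hwV : w ∈ V := (hpV.symm.mem_iff).mp
              (List.mem_append.mpr (Or.inl (List.erase_subset hw)))
            by_cases h : w = u
            · subst h; simpa using hval' w hwV
            · rw [hval' w hwV, if_neg h, if_neg h])
      have hers : pvSumV vals (V1.erase v) = pvSumV vals V1 - pvGetI vals v :=
        pvSumV_erase vals hvuV1.1
      have heq : (PySem.Int.mod (pvSideSum (E''.erase e0) vals' f a b) k = 0)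
          = (PySem.Int.mod (pvSideSum E'' vals f a b) k = 0) := by
        rw [hss', hss, hsumshift, hers]
        apply pvMod_shift
        have harr : pvSumV vals V1 - (pvSumV vals V1 - pvGetI vals v + a0)
            = -(a0 - pvGetI vals v) := by ring
        rw [harr]
        exact dvd_neg.mpr hkadv
      simp only [pvInd, heq]
    · -- v and u live on the b-side: nothing on the a-side changes
      have hd2pos := pvDegc_pos_of_mem he02 hince0
      rcases pvPeel_valid hp2 e0 he02 with ⟨a', b', he0ab, ha', hb', _⟩
      have huV2 : u ∈ V2 := by
        rcases hor with rfl | rfl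
        · obtain ⟨rfl, rfl⟩ : a' = v ∧ b' = u := by
            have := he0ab; simp at this; exact ⟨this.1.symm, this.2.symm⟩
          exact hb'
        · obtain ⟨rfl, rfl⟩ : a' = u ∧ b' = v := by
            have := he0ab; simp at this; exact ⟨this.1.symm, this.2.symm⟩
          exact ha'
      have hperm' : (E''.erase e0).Perm (E1 ++ ([a, b] :: E2.erase e0)) := by
        apply List.perm_iff_count.mpr
        intro x
        have hc := (List.perm_iff_count.mp hpE) x
        simp only [List.count_append, List.count_cons] at hc
        rw [List.count_append, List.count_cons, List.count_erase, List.count_erase, hc]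
        have h1 : (if e0 == x then 1 else 0) ≤ E2.count x := by
          by_cases hex : e0 = x
          · subst hex
            have := List.count_pos_iff.mpr he02
            simpa using this
          · have : (e0 == x) = false := by simpa using hex
            simp [this]
        omega
      have hss' : pvSideSum (E''.erase e0) vals' f a b = pvSumV vals' V1 := by
        refine pvSS V1.length V1 E1 ([a, b] :: E2.erase e0) _ vals' a b f
          le_rfl hp1 ha1 (hdisj b hb2) hperm' ?_ (by omega)
        intro e' he'
        rcases List.mem_cons.mp he' with rfl | he2
        · exact ⟨a, b, rfl, Or.inr (Or.inl ⟨rfl, rfl⟩)⟩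
        · rcases pvPeel_valid hp2 e' (List.erase_subset he2) with ⟨a', b', rfl, ha', hb', _⟩
          exact ⟨a', b', rfl, Or.inl ⟨hdisj a' ha', hdisj b' hb'⟩⟩
      have hcong : pvSumV vals' V1 = pvSumV vals V1 := by
        refine pvSum_congr V1 ?_
        intro w hw
        have hwV : w ∈ V := (hpV.symm.mem_iff).mp (List.mem_append.mpr (Or.inl hw))
        have hwu : w ≠ u := fun hh => hdisj u huV2 (hh ▸ hw)
        rw [hval' w hwV, if_neg hwu]
      have heq : (PySem.Int.mod (pvSideSum (E''.erase e0) vals' f a b) k = 0)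
          = (PySem.Int.mod (pvSideSum E'' vals f a b) k = 0) := by
        rw [hss', hss, hcong]
      simp only [pvInd, heq]
  -- assemble
  rw [pvCount_eq, (hpermE.map (pvInd E'' vals f k)).sum_eq]
  simp only [List.map_cons, List.sum_cons]
  rw [hhead, pvCount_eq]
  have hmap : (E''.erase e0).map (pvInd E'' vals f k)
      = (E''.erase e0).map (pvInd (E''.erase e0) vals' f k) :=
    List.map_congr_left hentry
  rw [hmap]

def pvAdjP (E : List (List Int)) (x y : Int) : Prop := ∃ e ∈ E, e = [x, y] ∨ e = [y, x]

def pvReachP (E : List (List Int)) : Int → Int → Prop := Relation.ReflTransGen (pvAdjP E)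

theorem pvAdjP_symm (E : List (List Int)) : Symmetric (pvAdjP E) := by
  intro x y ⟨e, he, h⟩
  exact ⟨e, he, h.symm⟩

theorem pvClosure_sound (edges : List (List Int)) :
    ∀ m x, x ∈ pvClosure edges m → pvReachP edges 0 x := by
  intro m
  induction m with
  | zero =>
      intro x hx
      simp [pvClosure] at hx
      subst hx
      exact Relation.ReflTransGen.refl
  | succ m ih =>
      intro x hx
      have ihS : ∀ y ∈ pvClosure edges m, pvReachP edges 0 y := ih
      -- one growing step stays sound for ANY sound start set
      have : ∀ (S : List Int), (∀ y ∈ S, pvReachP edges 0 y) → x ∈ pvGrow edges S →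
          pvReachP edges 0 x := by
        intro S hS hx
        rcases List.mem_append.mp hx with h | h
        · exact hS x h
        · rcases List.mem_filterMap.mp h with ⟨e, he, hmk⟩
          match e, hmk with
          | [u, v], hmk =>
              by_cases hu : u ∈ S
              · simp only [hu, if_true] at hmk
                have := hS u hu
                refine this.tail ⟨[u, v], he, Or.inl ?_⟩
                simp at hmk; rw [hmk]
              · simp only [hu, if_false] at hmk
                by_cases hv : v ∈ S
                · simp only [hv, if_true] at hmk
                  have := hS v hv
                  refine this.tail ⟨[u, v], he, Or.inr ?_⟩
                  simp at hmk; rw [hmk]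
                · simp [hv] at hmk
      -- pvClosure (m+1) = pvGrow (pvClosure m)
      exact this (pvClosure edges m) ihS (by simpa [pvClosure] using hx)

theorem pvTwo_le_countP {l : List (List Int)} {a b : List Int} (ha : a ∈ l) (hb : b ∈ l)
    (hab : a ≠ b) {p : List Int → Bool} (hpa : p a = true) (hpb : p b = true) :
    2 ≤ l.countP p := by
  have hperm : l.Perm (a :: l.erase a) := List.perm_cons_erase ha
  have hbe : b ∈ l.erase a := (List.mem_erase_of_ne hab.symm).mpr hb
  have h1 : 0 < (l.erase a).countP p := List.countP_pos_iff.mpr ⟨b, hbe, hpb⟩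
  have h2 : l.countP p = (a :: l.erase a).countP p := hperm.countP_eq p
  rw [h2]
  have h3 : (a :: l.erase a).countP p = (l.erase a).countP p + 1 := by
    simp [List.countP_cons, hpa]
  omega

-- walks survive the removal of a pendant edge (contract the removed leaf x0 to its neighbour u)
theorem pvReach_erase {E : List (List Int)} {x0 u : Int} {e0 : List Int}
    (hdeg : pvDegc E x0 = 1) (he0 : e0 ∈ E) (hor : e0 = [x0, u] ∨ e0 = [u, x0])
    (hux : u ≠ x0) :
    ∀ {x y}, pvReachP E x y → x ≠ x0 → pvReachP (E.erase e0) x (if y = x0 then u else y) := by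
  have hince0 : pvIncB x0 e0 = true := by
    rcases hor with rfl | rfl <;> simp [pvIncB_pair]
  intro x y h hx
  induction h with
  | refl =>
      rw [if_neg hx]
      exact Relation.ReflTransGen.refl
  | tail h1 h2 ih =>
      rename_i c y'
      have ihc := ih
      rcases h2 with ⟨e, he, heor⟩
      by_cases hy : y' = x0
      · -- the step enters x0: its edge must be e0, entered from u
        have hinc : pvIncB x0 e = true := by
          rcases heor with rfl | rfl <;> simp [pvIncB_pair, hy]
        have hee0 : e = e0 := by
          by_cases h' : e = e0
          · exact h'
          · have h2 := pvTwo_le_countP he he0 h' hinc hince0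
            unfold pvDegc at hdeg
            omega
        subst hee0
        have hcu : c = u := by
          rcases heor with h' | h' <;> rcases hor with h'' | h'' <;> rw [h''] at h' <;> simp at h'
          · exact absurd (h'.2.trans hy) hux
          · exact h'.1.symm
          · exact h'.2.symm
          · exact absurd (h'.1.trans hy) hux
        rw [if_pos hy]
        rw [hcu, if_neg hux] at ihc
        exact ihc
      · by_cases hc : c = x0
        · have hinc : pvIncB x0 e = true := by
            rcases heor with rfl | rfl <;> simp [pvIncB_pair, hc]
          have hee0 : e = e0 := by
            by_cases h' : e = e0
            · exact h'
            · have h2 := pvTwo_le_countP he he0 h' hinc hince0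
              unfold pvDegc at hdeg
              omega
          subst hee0
          have hyu : y' = u := by
            rcases heor with h' | h' <;> rcases hor with h'' | h'' <;> rw [h''] at h' <;> simp at h'
            · exact h'.2.symm
            · exact absurd h'.2.symm hy
            · exact absurd h'.1.symm hy
            · exact h'.1.symm
          rw [if_neg hy, hyu]
          rw [hc] at ihc
          simpa using ihc
        · have hee0 : e ≠ e0 := by
            intro hh
            rw [hh] at heor
            rcases heor with h' | h' <;> rcases hor with h'' | h'' <;> rw [h''] at h' <;> simp at h'
            · exact hc h'.1.symm
            · exact hy h'.2.symm
            · exact hy h'.1.symm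
            · exact hc h'.2.symm
          have he' : e ∈ E.erase e0 := (List.mem_erase_of_ne hee0).mpr he
          rw [if_neg hy]
          rw [if_neg hc] at ihc
          exact ihc.tail ⟨e, he', heor⟩

theorem pvExists_other {V : List Int} {x : Int} (hnd : V.Nodup) (h2 : 2 ≤ V.length)
    (hx : x ∈ V) : ∃ y ∈ V, y ≠ x := by
  match V, h2, hnd, hx with
  | a :: b :: rest, _, hnd, hx =>
      have hab : a ≠ b := by
        intro hh
        have := List.nodup_cons.mp hnd
        exact this.1 (by simp [hh])
      by_cases hxa : x = a
      · subst hxa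
        exact ⟨b, by simp, fun hh => hab hh.symm⟩
      · exact ⟨a, by simp, fun hh => hxa hh.symm⟩

-- a connected loop-free edge list with |V| - 1 entries on a duplicate-free vertex list is a peel-tree
theorem pvConnPeel : ∀ (N : Nat) (V : List Int) (E : List (List Int)),
    V.length ≤ N → V.Nodup → V ≠ [] → E.length + 1 = V.length →
    (∀ e ∈ E, ∃ a b, e = [a, b] ∧ a ∈ V ∧ b ∈ V ∧ a ≠ b) →
    (∀ x ∈ V, ∀ y ∈ V, pvReachP E x y) → pvPeel V E := by
  intro N
  induction N with
  | zero =>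
      intro V E hN _ hne _ _ _
      cases V with
      | nil => exact absurd rfl hne
      | cons a V => simp at hN
  | succ N ih =>
      intro V E hN hnd hne hlen hval hconn
      by_cases h1 : V.length = 1
      · obtain ⟨v, rfl⟩ : ∃ v, V = [v] := by
          match V, h1 with
          | [v], _ => exact ⟨v, rfl⟩
        have hlen1 : E.length + 1 = 1 := by simpa using hlen
        have hE : E = [] := List.length_eq_zero_iff.mp (by omega)
        rw [hE]
        exact pvPeel.single v
      · have h2 : 2 ≤ V.length := by
          have := List.length_pos_of_ne_nil hne
          omega
        -- every vertex has positive degree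
        have hdegpos : ∀ x ∈ V, 1 ≤ pvDegc E x := by
          intro x hx
          rcases pvExists_other hnd h2 hx with ⟨y, hy, hyx⟩
          have hr := hconn x hx y hy
          rcases (Relation.ReflTransGen.cases_head hr) with rfl | ⟨c, hadj, _⟩
          · exact absurd rfl hyx
          · rcases hadj with ⟨e, he, hcor⟩
            have : pvIncB x e = true := by
              rcases hcor with rfl | rfl <;> simp [pvIncB_pair]
            exact pvDegc_pos_of_mem he this
        -- a leaf exists
        have hleaf : ∃ x ∈ V, pvDegc E x = 1 := by
          by_contra hcon
          have hge : ∀ x ∈ V, 2 ≤ pvDegc E x := by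
            intro x hx
            have hp := hdegpos x hx
            have hn1 : pvDegc E x ≠ 1 := fun hh => hcon ⟨x, hx, hh⟩
            omega
          have hsum := pvSumLB V hge
          rw [pvHandshake E V hnd hval] at hsum
          omega
        rcases hleaf with ⟨x0, hx0, hdeg1⟩
        rcases List.countP_pos_iff.mp
            (show 0 < E.countP (pvIncB x0) by
              have hd := hdeg1; unfold pvDegc at hd; omega) with ⟨e0, he0, hinc0⟩
        rcases hval e0 he0 with ⟨a, b, rfl, haV, hbV, hab⟩
        have hx0ab : a = x0 ∨ b = x0 := by simpa [pvIncB_pair] using hinc0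
        -- name the neighbour u
        obtain ⟨u, hor, huV, hux⟩ : ∃ u, ([a, b] = [x0, u] ∨ [a, b] = [u, x0]) ∧ u ∈ V ∧ u ≠ x0 := by
          rcases hx0ab with rfl | rfl
          · exact ⟨b, Or.inl rfl, hbV, fun hh => hab hh.symm⟩
          · exact ⟨a, Or.inr rfl, haV, hab⟩
        have hnoinc : ∀ e ∈ E.erase [a, b], pvIncB x0 e = false := by
          intro e he
          by_cases hie : pvIncB x0 e = true
          · exfalso
            have hememb : e ∈ E := List.erase_subset he
            by_cases hee : e = [a, b]
            · rw [hee] at he hie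
              have h3 : 0 < (E.erase [a, b]).count [a, b] := List.count_pos_iff.mpr he
              have hcnt : 1 < E.count [a, b] := by
                have h4 : (E.erase [a, b]).count [a, b] = E.count [a, b] - 1 := by
                  rw [List.count_erase]; simp
                omega
              have h5 : 2 ≤ pvDegc E x0 := by
                unfold pvDegc
                calc 2 ≤ E.count [a, b] := hcnt
                _ ≤ E.countP (pvIncB x0) := by
                      rw [List.count]
                      apply List.countP_mono_left
                      intro e' _ he'
                      have he'' : e' = [a, b] := by simpa using he'
                      rw [he'']
                      exact hie
              omega
            · have := pvTwo_le_countP hememb he0 hee hie hinc0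
              unfold pvDegc at hdeg1
              omega
          · simpa using hie
        have hih : pvPeel (V.erase x0) (E.erase [a, b]) := by
          refine ih (V.erase x0) (E.erase [a, b]) ?_ (hnd.erase x0) ?_ ?_ ?_ ?_
          · have := List.length_erase_of_mem hx0
            omega
          · have : (V.erase x0).length = V.length - 1 := List.length_erase_of_mem hx0
            intro hh
            rw [hh] at this
            simp at this
            omega
          · have h3 := List.length_erase_of_mem hx0
            have h4 := List.length_erase_of_mem he0
            omega
          · intro e he
            rcases hval e (List.erase_subset he) with ⟨a', b', rfl, ha', hb', hab'⟩
            have hni := hnoinc _ he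
            have ha'0 : a' ≠ x0 := fun hh => by simp [pvIncB_pair, hh] at hni
            have hb'0 : b' ≠ x0 := fun hh => by simp [pvIncB_pair, hh] at hni
            exact ⟨a', b', rfl, (List.mem_erase_of_ne ha'0).mpr ha',
              (List.mem_erase_of_ne hb'0).mpr hb', hab'⟩
          · intro x hx y hy
            have hxV : x ∈ V := List.erase_subset hx
            have hyV : y ∈ V := List.erase_subset hy
            have hxx0 : x ≠ x0 := by
              intro hh
              rw [hh] at hx
              exact hnd.not_mem_erase hx
            have hyx0 : y ≠ x0 := by
              intro hh
              rw [hh] at hy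
              exact hnd.not_mem_erase hy
            have := pvReach_erase hdeg1 he0 hor hux (hconn x hxV y hyV) hxx0
            rwa [if_neg hyx0] at this
        refine pvPeel.step x0 u (V.erase x0) V E (E.erase [a, b])
          (hnd.not_mem_erase) ((List.mem_erase_of_ne hux).mpr huV) hih
          (List.perm_cons_erase hx0) ?_
        rcases hor with h' | h'
        · exact Or.inl (by rw [← h']; exact List.perm_cons_erase he0)
        · exact Or.inr (by rw [← h']; exact List.perm_cons_erase he0)

theorem pvGetI_setD {xs : List Int} {i : Int} (hi0 : 0 ≤ i) (hilen : i.toNat < xs.length)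
    (w : Int) : ∀ j, 0 ≤ j → pvGetI (PySem.List.pySetD xs i w) j = if j = i then w else pvGetI xs j := by
  intro j hj0
  unfold pvGetI
  rw [PySem.List.pySetD_of_nonneg xs w hi0, PySem.List.pyGet?_of_nonneg _ hj0,
    PySem.List.pyGet?_of_nonneg _ hj0, List.getElem?_set]
  by_cases h : j = i
  · subst h
    simp [hilen]
  · have : ¬ i.toNat = j.toNat := by omega
    simp [h, this]

theorem pvLen_setD (xs : List Int) {i : Int} (hi0 : 0 ≤ i) (w : Int) :
    (PySem.List.pySetD xs i w).length = xs.length := by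
  rw [PySem.List.pySetD_of_nonneg xs w hi0]
  simp

theorem pvLen_le_n {V : List Int} {n : Int} (hnd : V.Nodup) (hbd : ∀ v ∈ V, 0 ≤ v ∧ v < n) :
    V.length ≤ n.toNat := by
  have hsub : V ⊆ PySem.List.pyRange 0 n 1 := by
    intro v hv
    rcases hbd v hv with ⟨h1, h2⟩
    exact (PySem.List.mem_pyRange_one).mpr ⟨h1, h2⟩
  have := (List.Nodup.subperm hnd hsub).length_le
  rwa [PySem.List.length_pyRange_one, sub_zero] at this

-- membership in the induced edge list
theorem pvEfil_mem {edges : List (List Int)} {V : List Int} {a b : Int} :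
    [a, b] ∈ pvEfil edges V ↔ [a, b] ∈ edges ∧ a ∈ V ∧ b ∈ V := by
  unfold pvEfil
  rw [List.mem_filter]
  simp

theorem pvEfil_subset {edges : List (List Int)} {V : List Int} :
    ∀ e, e ∈ pvEfil edges V → e ∈ edges := fun e he => (List.mem_filter.mp he).1

theorem pvEfil_singleton {n x : Int} {edges : List (List Int)}
    (hok : ∀ e ∈ edges, pvEdgeOK n e = true) : pvEfil edges [x] = [] := by
  apply List.filter_eq_nil_iff.mpr
  intro e he
  have := hok e he
  match e, this with
  | [a, b], hOK =>
      simp only [pvEdgeOK] at hOK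
      have hab : a ≠ b := by simp at hOK; tauto
      simp only [Bool.and_eq_true, decide_eq_true_eq, List.mem_singleton]
      intro hcon
      rcases hcon with ⟨h1, h2⟩
      exact hab (h1.trans h2.symm)

-- valid-shape entries of the induced list
theorem pvEfil_valid {n : Int} {edges : List (List Int)} {V : List Int}
    (hok : ∀ e ∈ edges, pvEdgeOK n e = true) :
    ∀ e ∈ pvEfil edges V, ∃ a b, e = [a, b] ∧ a ∈ V ∧ b ∈ V ∧ a ≠ b ∧
      0 ≤ a ∧ a < n ∧ 0 ≤ b ∧ b < n := by
  intro e he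
  have hmem := pvEfil_subset e he
  have hOK := hok e hmem
  match e, hOK with
  | [a, b], hOK =>
      have hV : a ∈ V ∧ b ∈ V := (pvEfil_mem.mp he).2
      simp only [pvEdgeOK, decide_eq_true_eq] at hOK
      exact ⟨a, b, rfl, hV.1, hV.2, hOK.2.2.2.2, hOK.1, hOK.2.1, hOK.2.2.1, hOK.2.2.2.1⟩

-- Efil of the erased vertex list = erase of the unique incident entry
theorem pvFilter_not_eq_erase {l : List (List Int)} {p : List Int → Bool} {e0 : List Int} :
    ∀ (hcnt : l.countP p = 1) (he0 : e0 ∈ l) (hp : p e0 = true),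
    l.filter (fun e => !(p e)) = l.erase e0 := by
  induction l with
  | nil => intro _ he0 _; simp at he0
  | cons x l ih =>
      intro hcnt he0 hp
      rw [List.countP_cons] at hcnt
      by_cases hx : p x = true
      · have hl0 : l.countP p = 0 := by rw [hx] at hcnt; simpa using hcnt
        have hxe0 : x = e0 := by
          rcases List.mem_cons.mp he0 with h | h
          · exact h.symm
          · exfalso
            have := List.countP_eq_zero.mp hl0 e0 h
            exact this hp
        subst hxe0
        rw [List.erase_cons_head, List.filter_cons]
        have hnp : (!(p x)) = false := by rw [hx]; rfl
        rw [hnp]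
        simp only [Bool.false_eq_true, if_false]
        apply List.filter_eq_self.mpr
        intro e he
        have := List.countP_eq_zero.mp hl0 e he
        simpa using this
      · have hpx : p x = false := by simpa using hx
        have hxe0 : x ≠ e0 := fun hh => hx (hh ▸ hp)
        have he0l : e0 ∈ l := by
          rcases List.mem_cons.mp he0 with h | h
          · exact absurd h.symm hxe0
          · exact h
        rw [List.erase_cons_tail (by simpa using hxe0), List.filter_cons]
        have hcnt' : l.countP p = 1 := by rw [hpx] at hcnt; simpa using hcnt
        rw [ih hcnt' he0l hp]
        simp [hpx]

theorem pvEfil_erase {n v : Int} {edges : List (List Int)} {V : List Int} {e0 : List Int}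
    (hok : ∀ e ∈ edges, pvEdgeOK n e = true) (hnd : V.Nodup)
    (hcnt : (pvEfil edges V).countP (pvIncB v) = 1)
    (he0 : e0 ∈ pvEfil edges V) (hinc : pvIncB v e0 = true) :
    pvEfil edges (V.erase v) = (pvEfil edges V).erase e0 := by
  have hA : pvEfil edges (V.erase v) = (pvEfil edges V).filter (fun e => !(pvIncB v e)) := by
    unfold pvEfil
    rw [List.filter_filter]
    apply List.filter_congr
    intro e he
    match e with
    | [] => rfl
    | [a] => rfl
    | a :: b :: c :: r => rfl
    | [a, b] =>
        by_cases ha : a ∈ V <;> by_cases hb : b ∈ V <;> by_cases hav : a = v <;>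
          by_cases hbv : b = v <;>
          simp [pvIncB_pair, hnd.mem_erase_iff, ha, hb, hav, hbv]
  rw [hA]
  exact pvFilter_not_eq_erase hcnt he0 hinc

-- fold over skipped (already removed) neighbours is the identity
theorem pvFold_skip (add : Int) :
    ∀ (L : List Int) (st : List Int × List Int × List Int),
    (∀ w ∈ L, pvGetI st.1 w = 0) → L.foldl (pvNbrStep add) st = st := by
  intro L
  induction L with
  | nil => intro st _; rfl
  | cons w L ih =>
      intro st h
      have h0 : pvGetI st.1 w = 0 := h w (by simp)
      have : pvNbrStep add st w = st := by
        unfold pvNbrStep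
        rw [if_pos h0]
      rw [List.foldl_cons, this]
      exact ih st (fun w' hw' => h w' (by simp [hw']))

theorem pvFold_one (add : Int) (L1 L2 : List Int) (u : Int)
    (st : List Int × List Int × List Int)
    (hu0 : 0 ≤ u)
    (hskip : ∀ w ∈ L1 ++ L2, 0 ≤ w ∧ pvGetI st.1 w = 0 ∧ w ≠ u)
    (hact : ¬ pvGetI st.1 u = 0) :
    (L1 ++ u :: L2).foldl (pvNbrStep add) st = pvNbrStep add st u := by
  rw [List.foldl_append]
  rw [pvFold_skip add L1 st (fun w hw => (hskip w (by simp [hw])).2.1)]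
  rw [List.foldl_cons]
  apply pvFold_skip
  intro w hw
  have hsk := hskip w (by simp [hw])
  have hst1 : (pvNbrStep add st u).1 = pvDecAt st.1 u := by
    unfold pvNbrStep
    rw [if_neg hact]
  rw [hst1]
  unfold pvDecAt
  by_cases hlen : u.toNat < st.1.length
  · rw [pvGetI_setD hu0 hlen _ w hsk.1]
    rw [if_neg hsk.2.2]
    exact hsk.2.1
  · rw [PySem.List.pySetD_of_nonneg _ _ hu0, List.set_eq_of_length_le (by omega)]
    exact hsk.2.1

def pvBStep : (List Int × PySem.Dict Int (List Int)) → List Int → (List Int × PySem.Dict Int (List Int)) :=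
  fun st e => match e with
    | [u, v] => (pvIncAt (pvIncAt st.1 u) v,
                 (st.2.modify u [] (· ++ [v])).modify v [] (· ++ [u]))
    | _ => st

theorem pvBuild_eq (n : Int) (edges : List (List Int)) :
    pvBuild n edges = edges.foldl pvBStep (List.replicate n.toNat (0:Int), PySem.Dict.empty) := rfl

theorem pvNbrs_cons (e : List Int) (E : List (List Int)) (x : Int) :
    pvNbrs (e :: E) x = pvNbrs [e] x ++ pvNbrs E x := by
  unfold pvNbrs
  rw [show e :: E = [e] ++ E from rfl, List.filterMap_append]

theorem pvBuild_aux (n : Int) : ∀ (E : List (List Int)) (st : List Int × PySem.Dict Int (List Int)),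
    (∀ e ∈ E, pvEdgeOK n e = true) → st.1.length = n.toNat →
    (E.foldl pvBStep st).1.length = n.toNat ∧
    (∀ v, 0 ≤ v → v < n → pvGetI (E.foldl pvBStep st).1 v = pvGetI st.1 v + (pvDegc E v : Int)) ∧
    (∀ x : Int, ((E.foldl pvBStep st).2).getD x [] = st.2.getD x [] ++ pvNbrs E x) := by
  intro E
  induction E with
  | nil =>
      intro st _ hlen
      refine ⟨hlen, ?_, ?_⟩
      · intro v _ _; simp [pvDegc]
      · intro x; simp [pvNbrs]
  | cons e E ih =>
      intro st hok hlen
      match e, hok e (by simp) with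
      | [u, v], hOK =>
          simp only [pvEdgeOK, decide_eq_true_eq] at hOK
          obtain ⟨hu0, hun, hv0, hvn, huv⟩ := hOK
          have hstep : pvBStep st [u, v] = (pvIncAt (pvIncAt st.1 u) v,
              (st.2.modify u [] (· ++ [v])).modify v [] (· ++ [u])) := rfl
          have hul : u.toNat < st.1.length := by omega
          have hl2 : (pvIncAt (pvIncAt st.1 u) v).length = n.toNat := by
            unfold pvIncAt
            rw [pvLen_setD _ hv0, pvLen_setD _ hu0, hlen]
          have hdeg1 : ∀ w, 0 ≤ w → w < n →
              pvGetI (pvIncAt (pvIncAt st.1 u) v) w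
                = pvGetI st.1 w + (if pvIncB w [u, v] then 1 else 0) := by
            intro w hw0 _
            unfold pvIncAt
            have hvl' : v.toNat < (PySem.List.pySetD st.1 u (pvGetI st.1 u + 1)).length := by
              rw [pvLen_setD _ hu0]; omega
            rw [pvGetI_setD hv0 hvl' _ w hw0]
            by_cases h1 : w = v
            · rw [if_pos h1, ← h1]
              rw [pvGetI_setD hu0 hul _ w hw0, if_neg (fun hh : w = u => huv (hh.symm.trans h1))]
              simp [pvIncB_pair]
            · rw [if_neg h1, pvGetI_setD hu0 hul _ w hw0]
              by_cases h2 : w = u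
              · rw [if_pos h2, ← h2]
                simp [pvIncB_pair]
              · rw [if_neg h2]
                have hiv : pvIncB w [u, v] = false :=
                  pvIncB_pair_false (fun hh => h2 hh.symm) (fun hh => h1 hh.symm)
                rw [hiv]
                simp
          have hadj1 : ∀ x : Int,
              ((st.2.modify u [] (· ++ [v])).modify v [] (· ++ [u])).getD x []
                = st.2.getD x [] ++ pvNbrs [[u, v]] x := by
            intro x
            rw [PySem.Dict.getD_modify, PySem.Dict.getD_modify]
            by_cases hx1 : x = v
            · rw [if_pos hx1, if_neg (fun hh : v = u => huv hh.symm), hx1]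
              have hnb : pvNbrs [[u, v]] v = [u] := by
                have h1 : ¬ u = v := huv
                simp [pvNbrs, h1]
              rw [hnb]
            · rw [if_neg hx1, PySem.Dict.getD_modify]
              by_cases hx2 : x = u
              · rw [if_pos hx2, hx2]
                have hnb : pvNbrs [[u, v]] u = [v] := by simp [pvNbrs]
                rw [hnb]
              · rw [if_neg hx2]
                have hnb : pvNbrs [[u, v]] x = [] := by
                  have h1 : ¬ u = x := fun hh => hx2 hh.symm
                  have h2 : ¬ v = x := fun hh => hx1 hh.symm
                  simp [pvNbrs, h1, h2]
                rw [hnb]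
                simp
          have hok' : ∀ e' ∈ E, pvEdgeOK n e' = true := fun e' he' => hok e' (by simp [he'])
          rcases ih (pvBStep st [u, v]) hok' (by rw [hstep]; exact hl2) with ⟨ihl, ihd, iha⟩
          refine ⟨by simpa using ihl, ?_, ?_⟩
          · intro w hw0 hwn
            have := ihd w hw0 hwn
            rw [List.foldl_cons]
            rw [this, hstep]
            simp only [pvDegc_cons]
            rw [hdeg1 w hw0 hwn]
            push_cast
            by_cases h : pvIncB w [u, v] = true <;> simp [h] <;> ring
          · intro x
            rw [List.foldl_cons, iha x, hstep]
            simp only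
            rw [hadj1 x, List.append_assoc]
            conv_rhs => rw [pvNbrs_cons [u, v] E x]

theorem pvGetI_replicate (m : Nat) (v : Int) : pvGetI (List.replicate m (0:Int)) v = 0 := by
  unfold pvGetI
  cases h : PySem.List.pyGet? (List.replicate m (0:Int)) v with
  | none => rfl
  | some a =>
      have := PySem.List.mem_of_pyGet?_eq_some (xs := List.replicate m (0:Int)) (i := v) h
      simp at this
      simp [this]

theorem pvBuild_final (n : Int) (edges : List (List Int))
    (hok : ∀ e ∈ edges, pvEdgeOK n e = true) :
    (pvBuild n edges).1.length = n.toNat ∧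
    (∀ v, 0 ≤ v → v < n → pvGetI (pvBuild n edges).1 v = (pvDegc edges v : Int)) ∧
    (∀ x : Int, (pvBuild n edges).2.getD x [] = pvNbrs edges x) := by
  rw [pvBuild_eq]
  rcases pvBuild_aux n edges (List.replicate n.toNat (0:Int), PySem.Dict.empty) hok
    (by simp) with ⟨h1, h2, h3⟩
  refine ⟨h1, ?_, ?_⟩
  · intro v hv0 hvn
    rw [h2 v hv0 hvn]
    simp [pvGetI_replicate]
  · intro x
    rw [h3 x]
    simp [PySem.Dict.getD_empty]

theorem pvLoop_nilq (k : Int) (adj : PySem.Dict Int (List Int)) :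
    ∀ (f : Nat) (deg val : List Int) (c : Int), pvLoop k adj f deg val [] c = c := by
  intro f deg val c
  cases f <;> rfl

theorem pvNbrs_count (v u : Int) (huv : ¬ u = v) :
    ∀ (E : List (List Int)),
    (pvNbrs E v).count u = E.countP (fun e => e == [v, u] || e == [u, v]) := by
  intro E
  induction E with
  | nil => rfl
  | cons e E ih =>
      rw [pvNbrs_cons, List.count_append, ih, List.countP_cons]
      have hone : (pvNbrs [e] v).count u
          = (if (e == [v, u] || e == [u, v]) then 1 else 0) := by
        match e with
        | [] => simp [pvNbrs]
        | [p] => simp [pvNbrs]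
        | p :: q :: r :: t => simp [pvNbrs]
        | [p, q] =>
            by_cases hp : p = v <;> by_cases hq : q = v <;>
              by_cases hpu : p = u <;> by_cases hqu : q = u <;>
              simp [pvNbrs, hp, hq, hpu, hqu, huv, List.count_cons, List.count_nil] <;>
              omega
      omega

theorem pvCountP_add_le {l : List (List Int)} {p q r : List Int → Bool}
    (hp : ∀ a ∈ l, p a = true → r a = true) (hq : ∀ a ∈ l, q a = true → r a = true)
    (hdisj : ∀ a ∈ l, ¬(p a = true ∧ q a = true)) :
    l.countP p + l.countP q ≤ l.countP r := by
  induction l with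
  | nil => simp
  | cons x l ih =>
      have := ih (fun a ha => hp a (by simp [ha])) (fun a ha => hq a (by simp [ha]))
        (fun a ha => hdisj a (by simp [ha]))
      rw [List.countP_cons, List.countP_cons, List.countP_cons]
      have h1 := hp x (by simp)
      have h2 := hq x (by simp)
      have h3 := hdisj x (by simp)
      by_cases hpx : p x = true
      · have := h1 hpx
        by_cases hqx : q x = true
        · exact absurd ⟨hpx, hqx⟩ h3
        · simp [hpx, hqx, this]; omega
      · by_cases hqx : q x = true
        · have := h2 hqx
          simp [hpx, hqx, this]; omega
        · by_cases hrx : r x = true <;> simp [hpx, hqx, hrx] <;> omega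

theorem pvCountP_Efil {edges : List (List Int)} {V : List Int} {p : List Int → Bool}
    (himp : ∀ e ∈ edges, p e = true →
      (match e with | [a, b] => decide (a ∈ V) && decide (b ∈ V) | _ => false) = true) :
    (pvEfil edges V).countP p = edges.countP p := by
  unfold pvEfil
  rw [List.countP_filter]
  apply List.countP_congr
  intro e he
  constructor
  · intro h; exact (Bool.and_eq_true _ _).mp h |>.1
  · intro h
    exact (Bool.and_eq_true _ _).mpr ⟨h, himp e he h⟩

theorem pvNbrs_mem {E : List (List Int)} {x w : Int} (h : w ∈ pvNbrs E x) :
    ∃ e ∈ E, e = [x, w] ∨ e = [w, x] := by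
  rcases List.mem_filterMap.mp h with ⟨e, he, hmk⟩
  match e, hmk with
  | [p, q], hmk =>
      have hmk2 : (if p = x then some q else if q = x then some p else none) = some w := hmk
      by_cases hp : p = x
      · rw [if_pos hp] at hmk2
        refine ⟨[p, q], he, Or.inl ?_⟩
        simp at hmk2
        rw [hp, hmk2]
      · rw [if_neg hp] at hmk2
        by_cases hq : q = x
        · rw [if_pos hq] at hmk2
          refine ⟨[p, q], he, Or.inr ?_⟩
          simp at hmk2
          rw [hq, hmk2]
        · rw [if_neg hq] at hmk2
          simp at hmk2

-- THE loop invariant: peeling the current tree returns the accumulated count plus the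
-- per-edge divisible-side count of the remaining tree, plus one
theorem pvLoopInv (n k : Int) (edges : List (List Int)) (adj : PySem.Dict Int (List Int))
    (hadj : ∀ x : Int, adj.getD x [] = pvNbrs edges x)
    (hok : ∀ e ∈ edges, pvEdgeOK n e = true) :
    ∀ (f : Nat) (V' deg val q : List Int) (c : Int),
    V'.Nodup → V' ≠ [] → (∀ v ∈ V', 0 ≤ v ∧ v < n) →
    pvPeel V' (pvEfil edges V') →
    deg.length = n.toNat → n ≤ (val.length : Int) →
    (∀ v ∈ V', pvGetI deg v = (pvDegc (pvEfil edges V') v : Int)) →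
    (∀ v : Int, 0 ≤ v → v < n → v ∉ V' → pvGetI deg v = 0) →
    (∀ x : Int, x ∈ q ↔ (x ∈ V' ∧ pvDegc (pvEfil edges V') x ≤ 1)) →
    q.Nodup →
    k ∣ pvSumV val V' →
    V'.length + 1 ≤ f →
    pvLoop k adj f deg val q c = c + pvCount (pvEfil edges V') val (n.toNat + 1) k + 1 := by
  intro f
  induction f with
  | zero =>
      intro V' deg val q c _ _ _ _ _ _ _ _ _ _ _ hf
      simp at hf
  | succ f ih =>
      intro V' deg val q c hnd hne hbd hpeel hdl hvl hdegIn hdegOut hq hqnd htot hf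
      match q, hq, hqnd with
      | [], hq, _ =>
          exfalso
          rcases List.exists_mem_of_ne_nil V' hne with ⟨v₀, hv₀⟩
          by_cases hone : V'.length = 1
          · obtain ⟨w, rfl⟩ : ∃ w, V' = [w] := by
              match V', hone with
              | [w], _ => exact ⟨w, rfl⟩
            have hEfil : pvEfil edges [w] = [] := pvEfil_singleton hok
            have : w ∈ ([] : List Int) := (hq w).mpr ⟨by simp, by rw [hEfil]; simp [pvDegc]⟩
            simp at this
          · have h2 : 2 ≤ V'.length := by
              have := List.length_pos_of_mem hv₀
              omega
            rcases pvPeel_exists_leaf hpeel h2 with ⟨x, hx, hdx⟩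
            have : x ∈ ([] : List Int) := (hq x).mpr ⟨hx, by omega⟩
            simp at this
      | v :: qs, hq, hqnd =>
          have hvmem := (hq v).mp (by simp)
          obtain ⟨hvV, hvdeg⟩ := hvmem
          obtain ⟨hv0, hvn⟩ := hbd v hvV
          have hvlen : v.toNat < deg.length := by omega
          -- unfold one loop step
          rw [show pvLoop k adj (f + 1) deg val (v :: qs) c
              = pvLoop k adj f
                  ((adj.getD v []).foldl (pvNbrStep (if PySem.Int.mod (pvGetI val v) k = 0 then 0 else pvGetI val v)) (pvDecAt deg v, val, qs)).1
                  ((adj.getD v []).foldl (pvNbrStep (if PySem.Int.mod (pvGetI val v) k = 0 then 0 else pvGetI val v)) (pvDecAt deg v, val, qs)).2.1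
                  ((adj.getD v []).foldl (pvNbrStep (if PySem.Int.mod (pvGetI val v) k = 0 then 0 else pvGetI val v)) (pvDecAt deg v, val, qs)).2.2
                  (if PySem.Int.mod (pvGetI val v) k = 0 then c + 1 else c) from rfl]
          rw [hadj v]
          set add := (if PySem.Int.mod (pvGetI val v) k = 0 then 0 else pvGetI val v) with hadd
          set c1 := (if PySem.Int.mod (pvGetI val v) k = 0 then c + 1 else c) with hc1
          set deg1 := pvDecAt deg v with hdeg1def
          have hdeg1get : ∀ w : Int, 0 ≤ w →
              pvGetI deg1 w = if w = v then pvGetI deg v - 1 else pvGetI deg w := by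
            intro w hw
            rw [hdeg1def]
            unfold pvDecAt
            exact pvGetI_setD hv0 hvlen _ w hw
          have hdeg1len : deg1.length = n.toNat := by
            rw [hdeg1def]
            unfold pvDecAt
            rw [pvLen_setD _ hv0, hdl]
          have hqsmem : ∀ x : Int, x ∈ qs ↔ (x ∈ V' ∧ pvDegc (pvEfil edges V') x ≤ 1 ∧ x ≠ v) := by
            intro x
            constructor
            · intro hx
              have hxq := (hq x).mp (by simp [hx])
              refine ⟨hxq.1, hxq.2, ?_⟩
              intro hh
              rw [hh] at hx
              exact (List.nodup_cons.mp hqnd).1 hx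
            · intro ⟨h1, h2, h3⟩
              have := (hq x).mpr ⟨h1, h2⟩
              rcases List.mem_cons.mp this with hh | hh
              · exact absurd hh h3
              · exact hh
          by_cases hd0 : pvDegc (pvEfil edges V') v = 0
          · -- terminal case: V' = [v]
            have hsing : V' = [v] := pvPeel_deg_zero hpeel v hvV hd0
            have hEfil : pvEfil edges [v] = [] := pvEfil_singleton hok
            have hqs : qs = [] := by
              rw [List.eq_nil_iff_forall_not_mem]
              intro x hx
              have := ((hqsmem x).mp hx)
              rw [hsing] at this
              rcases this with ⟨h1, _, h3⟩
              simp at h1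
              exact h3 h1
            have hskipall : (pvNbrs edges v).foldl (pvNbrStep add) (deg1, val, qs) = (deg1, val, qs) := by
              apply pvFold_skip
              intro w hw
              rcases pvNbrs_mem hw with ⟨e, he, hor⟩
              have hOK := hok e he
              have hwp : 0 ≤ w ∧ w < n ∧ w ≠ v := by
                rcases hor with rfl | rfl <;> simp only [pvEdgeOK, decide_eq_true_eq] at hOK
                · exact ⟨hOK.2.2.1, hOK.2.2.2.1, fun hh => hOK.2.2.2.2 hh.symm⟩
                · exact ⟨hOK.1, hOK.2.1, hOK.2.2.2.2⟩
              have hwnV : w ∉ V' := by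
                rw [hsing]
                simp
                exact hwp.2.2
              rw [hdeg1get w hwp.1, if_neg hwp.2.2]
              exact hdegOut w hwp.1 hwp.2.1 hwnV
            rw [hskipall]
            simp only
            rw [hqs, pvLoop_nilq]
            -- value side: v's remaining value is the whole (divisible) total
            have hv1 : pvSumV val V' = pvGetI val v := by rw [hsing]; simp [pvSumV]
            have hmodv : PySem.Int.mod (pvGetI val v) k = 0 := by
              rw [PySem.Int.mod_eq_zero_iff_dvd]
              rw [← hv1]
              exact htot
            rw [hc1, if_pos hmodv, hsing, hEfil]
            have hc0 : pvCount [] val (n.toNat + 1) k = 0 := rfl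
            rw [hc0]
            ring
          · -- main case: degc v = 1, |V'| ≥ 2
            have hd1 : pvDegc (pvEfil edges V') v = 1 := by omega
            rcases List.countP_pos_iff.mp (show 0 < (pvEfil edges V').countP (pvIncB v) by
              have hdd := hd1; unfold pvDegc at hdd; omega) with ⟨e0, he0, hinc0⟩
            rcases pvEfil_valid hok e0 he0 with ⟨a, b, he0ab, haV, hbV, hab, ha0, han, hb0, hbn⟩
            have hx0ab : a = v ∨ b = v := by
              rw [he0ab] at hinc0
              simpa [pvIncB_pair] using hinc0
            obtain ⟨u, hor, huV, huv, hu0, hun⟩ :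
                ∃ u, (e0 = [v, u] ∨ e0 = [u, v]) ∧ u ∈ V' ∧ u ≠ v ∧ 0 ≤ u ∧ u < n := by
              rcases hx0ab with h' | h'
              · exact ⟨b, Or.inl (by rw [he0ab, h']), hbV,
                  fun hh => hab (h'.trans hh.symm), hb0, hbn⟩
              · exact ⟨a, Or.inr (by rw [he0ab, h']), haV,
                  fun hh => hab (hh.trans h'.symm), ha0, han⟩
            have hince0 : pvIncB v e0 = true := hinc0
            have hince0u : pvIncB u e0 = true := by
              rcases hor with rfl | rfl <;> simp [pvIncB_pair]
            have hdeg1v : pvGetI deg1 v = 0 := by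
              rw [hdeg1get v hv0, if_pos rfl, hdegIn v hvV, hd1]
              simp
            have hdeg1u : pvGetI deg1 u = (pvDegc (pvEfil edges V') u : Int) := by
              rw [hdeg1get u hu0, if_neg huv, hdegIn u huV]
            have hdegu_pos : 0 < pvDegc (pvEfil edges V') u := pvDegc_pos_of_mem he0 hince0u
            -- the unique occurrence of u in v's adjacency
            have hcntu : (pvNbrs edges v).count u = 1 := by
              rw [pvNbrs_count v u (fun hh => huv hh)]
              have hmemP : ∀ e' ∈ edges, (e' == [v, u] || e' == [u, v]) = true →
                  (match e' with | [a, b] => decide (a ∈ V') && decide (b ∈ V') | _ => false) = true := by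
                intro e' _ hpe
                simp only [Bool.or_eq_true, beq_iff_eq] at hpe
                rcases hpe with rfl | rfl <;> simp [hvV, huV]
              have heqc := pvCountP_Efil (edges := edges) (V := V')
                (p := fun e' => e' == [v, u] || e' == [u, v]) hmemP
              have hmono := List.countP_mono_left (l := pvEfil edges V')
                  (p := fun e' => e' == [v, u] || e' == [u, v]) (q := pvIncB v)
                  (by
                    intro e' _ hpe
                    simp only [Bool.or_eq_true, beq_iff_eq] at hpe
                    rcases hpe with rfl | rfl <;> simp [pvIncB_pair])
              have hge : 0 < (pvEfil edges V').countP (fun e' => e' == [v, u] || e' == [u, v]) := by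
                apply List.countP_pos_iff.mpr
                refine ⟨e0, he0, ?_⟩
                rcases hor with rfl | rfl <;> simp
              have hdd := hd1
              unfold pvDegc at hdd
              omega
            have humem : u ∈ pvNbrs edges v := List.count_pos_iff.mp (by omega)
            rcases List.append_of_mem humem with ⟨L1, L2, hLsplit⟩
            have hnotL : u ∉ L1 ∧ u ∉ L2 := by
              rw [hLsplit] at hcntu
              simp only [List.count_append, List.count_cons] at hcntu
              constructor <;> intro hh <;> have := List.count_pos_iff.mpr hh <;> simp at hcntu <;> omega
            have hskipprop : ∀ w ∈ L1 ++ L2, 0 ≤ w ∧ pvGetI deg1 w = 0 ∧ w ≠ u := by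
              intro w hw
              have hwu : w ≠ u := by
                intro hh
                rcases List.mem_append.mp hw with h' | h'
                · exact hnotL.1 (hh ▸ h')
                · exact hnotL.2 (hh ▸ h')
              have hwnbr : w ∈ pvNbrs edges v := by
                rw [hLsplit]
                rcases List.mem_append.mp hw with h' | h' <;> simp [h']
              rcases pvNbrs_mem hwnbr with ⟨e, he, hore⟩
              have hOK := hok e he
              have hwp : 0 ≤ w ∧ w < n ∧ w ≠ v := by
                rcases hore with rfl | rfl <;> simp only [pvEdgeOK, decide_eq_true_eq] at hOK
                · exact ⟨hOK.2.2.1, hOK.2.2.2.1, fun hh => hOK.2.2.2.2 hh.symm⟩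
                · exact ⟨hOK.1, hOK.2.1, hOK.2.2.2.2⟩
              have hwnV : w ∉ V' := by
                intro hwV
                have hcntw_pos : 0 < edges.countP (fun e' => e' == [v, w] || e' == [w, v]) := by
                  apply List.countP_pos_iff.mpr
                  exact ⟨e, he, by rcases hore with rfl | rfl <;> simp⟩
                have heqw := pvCountP_Efil (edges := edges) (V := V')
                  (p := fun e' => e' == [v, w] || e' == [w, v])
                  (by
                    intro e' _ hpe
                    simp only [Bool.or_eq_true, beq_iff_eq] at hpe
                    rcases hpe with rfl | rfl <;> simp [hvV, hwV])
                have hp1 : 0 < (pvEfil edges V').countP (fun e' => e' == [v, u] || e' == [u, v]) := by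
                  apply List.countP_pos_iff.mpr
                  refine ⟨e0, he0, ?_⟩
                  rcases hor with rfl | rfl <;> simp
                have hcomb := pvCountP_add_le (l := pvEfil edges V')
                    (p := fun e' => e' == [v, u] || e' == [u, v])
                    (q := fun e' => e' == [v, w] || e' == [w, v])
                    (r := pvIncB v)
                    (by
                      intro e' _ hpe
                      simp only [Bool.or_eq_true, beq_iff_eq] at hpe
                      rcases hpe with rfl | rfl <;> simp [pvIncB_pair])
                    (by
                      intro e' _ hpe
                      simp only [Bool.or_eq_true, beq_iff_eq] at hpe
                      rcases hpe with rfl | rfl <;> simp [pvIncB_pair])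
                    (by
                      intro e' _ hcon
                      rcases hcon with ⟨hp, hq2⟩
                      simp only [Bool.or_eq_true, beq_iff_eq] at hp hq2
                      rcases hp with rfl | rfl <;> rcases hq2 with hq2 | hq2 <;> simp at hq2
                      · exact hwu hq2.symm
                      · exact hwp.2.2 hq2.1.symm
                      · exact huv hq2.1
                      · exact hwu hq2.symm)
                rw [← heqw] at hcntw_pos
                have hdd := hd1
                unfold pvDegc at hdd
                omega
              rw [hdeg1get w hwp.1, if_neg hwp.2.2]
              exact ⟨hwp.1, hdegOut w hwp.1 hwp.2.1 hwnV, hwu⟩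
            have hact : ¬ pvGetI deg1 u = 0 := by
              rw [hdeg1u]
              intro hh
              have : pvDegc (pvEfil edges V') u = 0 := by exact_mod_cast hh
              omega
            have hfold : (pvNbrs edges v).foldl (pvNbrStep add) (deg1, val, qs)
                = pvNbrStep add (deg1, val, qs) u := by
              rw [hLsplit]
              exact pvFold_one add L1 L2 u (deg1, val, qs) hu0 hskipprop hact
            rw [hfold]
            have hulen1 : u.toNat < deg1.length := by omega
            set deg2 := pvDecAt deg1 u with hdeg2def
            set val2 := pvAddAt val u add with hval2def
            have hstep_eq : pvNbrStep add (deg1, val, qs) u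
                = (deg2, val2, if pvGetI deg2 u = 1 then qs ++ [u] else qs) := by
              unfold pvNbrStep
              rw [if_neg hact]
            rw [hstep_eq]
            simp only
            -- the new tree
            set V'' := V'.erase v with hV''def
            have hEfil'' : pvEfil edges V'' = (pvEfil edges V').erase e0 :=
              pvEfil_erase hok hnd (by have hdd := hd1; unfold pvDegc at hdd; exact hdd) he0 hinc0
            have hnd'' : V''.Nodup := hnd.erase v
            have hV''len : V''.length = V'.length - 1 := List.length_erase_of_mem hvV
            have hVlen2 : 2 ≤ V'.length := by
              by_contra hh
              have h1 : V'.length = 1 := by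
                have := List.length_pos_of_mem hvV
                omega
              obtain ⟨w, rfl⟩ : ∃ w, V' = [w] := by
                match V', h1 with
                | [w], _ => exact ⟨w, rfl⟩
              rw [pvEfil_singleton hok] at hd1
              simp [pvDegc] at hd1
            have hV''ne : V'' ≠ [] := by
              intro hh
              rw [hh] at hV''len
              simp at hV''len
              omega
            have hmemV'' : ∀ x : Int, x ∈ V'' ↔ (x ≠ v ∧ x ∈ V') := fun x => hnd.mem_erase_iff
            have hpeel'' : pvPeel V'' (pvEfil edges V'') := by
              rw [hEfil'']
              exact pvPeel_erase hpeel v e0 hvV hd1 he0 hinc0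
            have huV'' : u ∈ V'' := (hmemV'' u).mpr ⟨huv, huV⟩
            -- degrees in the new tree
            have hdegc'' : ∀ x ∈ V'', pvDegc (pvEfil edges V') x
                = pvDegc (pvEfil edges V'') x + (if x = u then 1 else 0) := by
              intro x hx
              obtain ⟨hxv, hxV⟩ := (hmemV'' x).mp hx
              have hperm0 : (pvEfil edges V').Perm (e0 :: (pvEfil edges V').erase e0) :=
                List.perm_cons_erase he0
              rw [pvDegc_perm hperm0 x, pvDegc_cons, hEfil'']
              have hie : pvIncB x e0 = (if x = u then true else false) := by
                by_cases hxu : x = u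
                · rw [if_pos hxu, hxu]
                  exact hince0u
                · rw [if_neg hxu]
                  rcases hor with rfl | rfl
                  · exact pvIncB_pair_false (fun hh => hxv hh.symm) (fun hh => hxu hh.symm)
                  · exact pvIncB_pair_false (fun hh => hxu hh.symm) (fun hh => hxv hh.symm)
              rw [hie]
              by_cases hxu : x = u <;> simp [hxu] <;> omega
            have hdeg2get : ∀ w : Int, 0 ≤ w →
                pvGetI deg2 w = if w = u then pvGetI deg1 u - 1 else pvGetI deg1 w := by
              intro w hw
              rw [hdeg2def]
              unfold pvDecAt
              exact pvGetI_setD hu0 hulen1 _ w hw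
            have hval2get : ∀ w : Int, 0 ≤ w →
                pvGetI val2 w = if w = u then pvGetI val u + add else pvGetI val w := by
              intro w hw
              rw [hval2def]
              unfold pvAddAt
              refine pvGetI_setD hu0 ?_ _ w hw
              omega
            have hval2len : val2.length = val.length := by
              rw [hval2def]
              unfold pvAddAt
              exact pvLen_setD _ hu0 _
            -- residue arithmetic
            have hkadv : k ∣ (add - pvGetI val v) := by
              rw [hadd]
              by_cases h : PySem.Int.mod (pvGetI val v) k = 0
              · rw [if_pos h]
                have := (PySem.Int.mod_eq_zero_iff_dvd _ _).mp h
                rw [zero_sub]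
                exact dvd_neg.mpr this
              · rw [if_neg h]; simp
            have htot'' : k ∣ pvSumV val2 V'' := by
              have hshift : pvSumV val2 V'' = pvSumV val V'' + add := by
                refine pvSum_shift add (pvGetI val) (pvGetI val2) V'' u hnd'' huV'' ?_
                intro w hw
                obtain ⟨_, hwV⟩ := (hmemV'' w).mp hw
                by_cases hwu : w = u
                · rw [hwu, if_pos rfl]
                  simpa using hval2get u hu0
                · rw [hval2get w (hbd w hwV).1, if_neg hwu, if_neg hwu]
              have hers : pvSumV val V'' = pvSumV val V' - pvGetI val v := pvSumV_erase val hvV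
              rw [hshift, hers]
              have harr : pvSumV val V' - pvGetI val v + add
                  = pvSumV val V' + (add - pvGetI val v) := by ring
              rw [harr]
              exact dvd_add htot hkadv
            -- apply the induction hypothesis to the new state
            have hih := ih V'' deg2 val2 (if pvGetI deg2 u = 1 then qs ++ [u] else qs) c1
              hnd'' hV''ne
              (fun x hx => hbd x ((hmemV'' x).mp hx).2)
              hpeel''
              (by rw [hdeg2def]; unfold pvDecAt; rw [pvLen_setD _ hu0, hdeg1len])
              (by rw [hval2len]; exact hvl)
              ?_ ?_ ?_ ?_ htot'' (by omega)
            · rw [hih]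
              -- the per-edge count recurrence
              have hlen_le : V'.length ≤ n.toNat + 1 := by
                have := pvLen_le_n hnd hbd
                omega
              have hmrec := pvMrec hpeel hvV hd1 he0 hor huv val val2 add hadd
                (fun w hwV => hval2get w (hbd w hwV).1) htot (n.toNat + 1) hlen_le
              rw [← hEfil''] at hmrec
              rw [hmrec, hc1]
              by_cases h : PySem.Int.mod (pvGetI val v) k = 0 <;> simp [h] <;> ring
            · -- degrees inside the new tree
              intro x hx
              obtain ⟨hxv, hxV⟩ := (hmemV'' x).mp hx
              rw [hdeg2get x (hbd x hxV).1]
              by_cases hxu : x = u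
              · rw [if_pos hxu, hxu, hdeg1u]
                have := hdegc'' u huV''
                rw [if_pos rfl] at this
                rw [this]
                push_cast
                ring
              · rw [if_neg hxu]
                rw [hdeg1get x (hbd x hxV).1, if_neg hxv, hdegIn x hxV]
                have := hdegc'' x hx
                rw [if_neg hxu] at this
                rw [this]
                simp
            · -- degrees outside the new tree
              intro x hx0 hxn hxnV
              rw [hdeg2get x hx0]
              have hxu : x ≠ u := fun hh => hxnV (hh ▸ huV'')
              rw [if_neg hxu, hdeg1get x hx0]
              by_cases hxv : x = v
              · rw [if_pos hxv, hdegIn v hvV, hd1]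
                simp
              · rw [if_neg hxv]
                refine hdegOut x hx0 hxn ?_
                intro hxV
                exact hxnV ((hmemV'' x).mpr ⟨hxv, hxV⟩)
            · -- queue characterisation
              intro x
              have hdequ : pvGetI deg2 u = (pvDegc (pvEfil edges V') u : Int) - 1 := by
                rw [hdeg2get u hu0, if_pos rfl, hdeg1u]
              have hdcu := hdegc'' u huV''
              rw [if_pos rfl] at hdcu
              by_cases hcond : pvGetI deg2 u = 1
              · rw [if_pos hcond]
                have hdu2 : pvDegc (pvEfil edges V') u = 2 := by
                  rw [hdequ] at hcond
                  omega
                constructor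
                · intro hx
                  rcases List.mem_append.mp hx with hx' | hx'
                  · obtain ⟨h1, h2, h3⟩ := (hqsmem x).mp hx'
                    have hxu : x ≠ u := by
                      intro hh
                      rw [hh, hdu2] at h2
                      omega
                    refine ⟨(hmemV'' x).mpr ⟨h3, h1⟩, ?_⟩
                    have := hdegc'' x ((hmemV'' x).mpr ⟨h3, h1⟩)
                    rw [if_neg hxu] at this
                    omega
                  · have hxu : x = u := by simpa using hx'
                    refine ⟨hxu ▸ huV'', ?_⟩
                    rw [hxu]
                    omega
                · intro ⟨hxV'', hxd⟩
                  obtain ⟨hxv, hxV⟩ := (hmemV'' x).mp hxV''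
                  by_cases hxu : x = u
                  · simp [hxu]
                  · apply List.mem_append.mpr
                    left
                    apply (hqsmem x).mpr
                    have := hdegc'' x hxV''
                    rw [if_neg hxu] at this
                    exact ⟨hxV, by omega, hxv⟩
              · rw [if_neg hcond]
                constructor
                · intro hx
                  obtain ⟨h1, h2, h3⟩ := (hqsmem x).mp hx
                  have hxV'' := (hmemV'' x).mpr ⟨h3, h1⟩
                  refine ⟨hxV'', ?_⟩
                  have hrec := hdegc'' x hxV''
                  by_cases hxu : x = u
                  · rw [if_pos hxu] at hrec
                    omega
                  · rw [if_neg hxu] at hrec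
                    omega
                · intro ⟨hxV'', hxd⟩
                  obtain ⟨hxv, hxV⟩ := (hmemV'' x).mp hxV''
                  apply (hqsmem x).mpr
                  by_cases hxu : x = u
                  · refine ⟨hxV, ?_, hxv⟩
                    rw [hxu] at hxd ⊢
                    have hne2 : pvDegc (pvEfil edges V') u ≠ 2 := by
                      intro hh
                      rw [hdequ, hh] at hcond
                      simp at hcond
                    omega
                  · have := hdegc'' x hxV''
                    rw [if_neg hxu] at this
                    exact ⟨hxV, by omega, hxv⟩
            · -- queue distinctness
              by_cases hcond : pvGetI deg2 u = 1
              · rw [if_pos hcond]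
                have hdu2 : pvDegc (pvEfil edges V') u = 2 := by
                  rw [hdeg2get u hu0, if_pos rfl, hdeg1u] at hcond
                  omega
                have hniq : u ∉ qs := by
                  intro hh
                  obtain ⟨_, h2, _⟩ := (hqsmem u).mp hh
                  omega
                have hqs' : qs.Nodup := (List.nodup_cons.mp hqnd).2
                simp [List.nodup_append, hqs']
                exact fun a ha hh => hniq (hh ▸ ha)
              · rw [if_neg hcond]
                exact (List.nodup_cons.mp hqnd).2

theorem pv_main : ∀ (n : Int) (edges : List (List Int)) (values : List Int) (k : Int), Pre_maxKDivisibleComponents n edges values k → maxKDivisibleComponents n edges values k = maxKDivisibleComponents_alt n edges values k := by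
  intro n edges values k hpre
  by_cases hE : edges = []
  · subst hE; rfl
  rcases hpre with h | ⟨hn, hvl, hk, hok, hclo, htotmod⟩
  · exact absurd h hE
  set V := PySem.List.pyRange 0 n 1 with hVdef
  have hmemV : ∀ x : Int, x ∈ V ↔ 0 ≤ x ∧ x < n := fun x => PySem.List.mem_pyRange_one
  have hVnd : V.Nodup := PySem.List.nodup_pyRange_one 0 n
  have hlenpos : 1 ≤ edges.length := by
    cases edges with
    | nil => exact absurd rfl hE
    | cons a l => simp
  have hn2 : 2 ≤ n := by omega
  have hVlen : V.length = n.toNat := by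
    rw [hVdef, PySem.List.length_pyRange_one]; simp
  have hVne : V ≠ [] := by
    intro hh; rw [hh] at hVlen; simp at hVlen; omega
  have hval : ∀ e ∈ edges, ∃ a b, e = [a, b] ∧ a ∈ V ∧ b ∈ V ∧ a ≠ b := by
    intro e he
    have hOK := hok e he
    match e, hOK with
    | [a, b], hOK =>
        simp only [pvEdgeOK, decide_eq_true_eq] at hOK
        exact ⟨a, b, rfl, (hmemV a).mpr ⟨hOK.1, hOK.2.1⟩,
          (hmemV b).mpr ⟨hOK.2.2.1, hOK.2.2.2.1⟩, hOK.2.2.2.2⟩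
  have hEfil : pvEfil edges V = edges := by
    apply List.filter_eq_self.mpr
    intro e he
    rcases hval e he with ⟨a, b, rfl, ha, hb, _⟩
    simp [ha, hb]
  have hreach : ∀ x ∈ V, ∀ y ∈ V, pvReachP edges x y := by
    intro x hx y hy
    have hsym : Symmetric (pvReachP edges) :=
      Relation.ReflTransGen.symmetric (pvAdjP_symm edges)
    exact Relation.ReflTransGen.trans
      (hsym (pvClosure_sound edges n.toNat x (hclo x hx)))
      (pvClosure_sound edges n.toNat y (hclo y hy))
  have hpeel : pvPeel V edges := by
    refine pvConnPeel V.length V edges le_rfl hVnd hVne ?_ hval hreach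
    omega
  have hdegpos : ∀ x ∈ V, 0 < pvDegc edges x := by
    intro x hx
    rcases pvExists_other hVnd (by omega) hx with ⟨y, hy, hyx⟩
    rcases (Relation.ReflTransGen.cases_head (hreach x hx y hy)) with rfl | ⟨c, hadj, _⟩
    · exact absurd rfl hyx
    · rcases hadj with ⟨e, he, hcor⟩
      have : pvIncB x e = true := by
        rcases hcor with rfl | rfl <;> simp [pvIncB_pair]
      exact pvDegc_pos_of_mem he this
  rcases pvBuild_final n edges hok with ⟨hblen, hbdeg, hbadj⟩
  have hgoalA : maxKDivisibleComponents n edges values k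
      = pvLoop k (pvBuild n edges).2 (n.toNat + 2 * edges.length + 1) (pvBuild n edges).1 values
          (V.filter (fun v => decide (pvGetI (pvBuild n edges).1 v = 1))) 0 := by
    simp only [maxKDivisibleComponents, if_neg hE, hVdef]
  rw [hgoalA]
  have hinv := pvLoopInv n k edges (pvBuild n edges).2 hbadj hok
      (n.toNat + 2 * edges.length + 1) V (pvBuild n edges).1 values
      (V.filter (fun v => decide (pvGetI (pvBuild n edges).1 v = 1))) 0
      hVnd hVne (fun v hv => (hmemV v).mp hv)
      (by rw [hEfil]; exact hpeel)
      hblen hvl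
      (by
        intro v hv
        rcases (hmemV v).mp hv with ⟨h1, h2⟩
        rw [hEfil]
        exact hbdeg v h1 h2)
      (by
        intro v h0 hn' hnv
        exact absurd ((hmemV v).mpr ⟨h0, hn'⟩) hnv)
      (by
        intro x
        rw [List.mem_filter]
        constructor
        · intro ⟨hxV, hxd⟩
          rcases (hmemV x).mp hxV with ⟨h1, h2⟩
          have hd : pvGetI (pvBuild n edges).1 x = 1 := by simpa using hxd
          rw [hbdeg x h1 h2] at hd
          have : pvDegc edges x = 1 := by exact_mod_cast hd
          rw [hEfil]
          exact ⟨hxV, by omega⟩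
        · intro ⟨hxV, hxd⟩
          rcases (hmemV x).mp hxV with ⟨h1, h2⟩
          rw [hEfil] at hxd
          have hpos := hdegpos x hxV
          have hd1 : pvDegc edges x = 1 := by omega
          refine ⟨hxV, ?_⟩
          rw [hbdeg x h1 h2, hd1]
          simp)
      (hVnd.filter _)
      ((PySem.Int.mod_eq_zero_iff_dvd _ _).mp htotmod)
      (by omega)
  rw [hinv, hEfil, pvAlt_eq_count]
  ring

-- ===== VERDICT (by name: the statement is the Claim_ definition above) =====
theorem maxKDivisibleComponents_spec : Claim_equal_maxKDivisibleComponents := by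
  intro n edges values k _ hpre
  exact pv_main n edges values k hpre
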